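-- pv_equiv track=rewrite | github.com/zacheen/python | question_practice/leetcode/Contest result/Biweekly Contest 167/4_3710. Maximum Partition Factor/A.py | maxPartitionFactor
-- ===== SOURCE A (Python) =====
-- from typing import List
-- from collections import defaultdict
--
-- class UF_Parity:
--     def __init__(self, n):
--         self.id = list(range(n))
--         self.set_member_cnt = [1]*n    # <計算各個 set 的個數> 多的
--         self.x = [0]*n
--
--     def union(self, n1, n2, w = 1):
--         f_n1 = self.find(n1)
--         f_n2 = self.find(n2)
--         if f_n1 == f_n2:
--             return (self.x[n1] ^ self.x[n2]) == w
--         if self.set_member_cnt[f_n1] > self.set_member_cnt[f_n2] : #  <Union by size> 多的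
--             f_n1,f_n2 = f_n2,f_n1
--             n1, n2 = n2, n1
--         # merge f_n1 into f_n2
--         self.id[f_n1] = f_n2
--         self.x[f_n1] = (self.x[n1] ^ self.x[n2] ^ w)
--         self.set_member_cnt[f_n2] += self.set_member_cnt[f_n1]  # <計算各個 set 的個數> 多的
--         return True
--
--     def find(self, up):
--         # To maintain Parity here can't use Half Path Compression
--         if self.id[up] != up:
--             deep = self.find(self.id[up])
--             self.x[up] ^= self.x[self.id[up]]
--             self.id[up] = deep
--         return self.id[up]
--
-- def maxPartitionFactor(points: List[List[int]]) -> int: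
--     # maximum possible partition factor over all valid splits
--
--     dis_bucket = defaultdict(list)
--     for p1i, (p1x,p1y) in enumerate(points):
--         for p2i, (p2x,p2y) in enumerate(points[:p1i]):
--             dis = abs(p1x-p2x) + abs(p1y-p2y)
--             dis_bucket[dis].append((p1i, p2i))
--
--     uf = UF_Parity(len(points))
--     for dis in sorted(dis_bucket.keys()):
--         for p1i, p2i in dis_bucket[dis] :
--             # when I want to seperate p1i, p2i into two different set, it fails
--             if not uf.union(p1i, p2i) :
--                 return dis
--     return 0
-- ===== SOURCE B (Python) =====
-- def maxPartitionFactor(points):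
--     # Flat edge list + one stable sort by distance + quick-find with explicit
--     # 2-coloring (whole-component relabel on merge), instead of A's per-distance
--     # dict buckets + parity union-find with path compression / union by size.
--     n = len(points)
--     edges = []
--     for i in range(n):
--         x1, y1 = points[i]
--         for j in range(i):
--             x2, y2 = points[j]
--             edges.append((abs(x1 - x2) + abs(y1 - y2), i, j))
--     edges.sort(key=lambda e: e[0])
--     comp = list(range(n))
--     color = [0] * n
--     for d, i, j in edges:
--         if comp[i] == comp[j]:
--             if color[i] == color[j]:
--                 return d
--         else:
--             ci = comp[i]
--             cj = comp[j]
--             flip = color[i] ^ color[j] ^ 1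
--             for k in range(n):
--                 if comp[k] == ci:
--                     comp[k] = cj
--                     color[k] ^= flip
--     return 0
-- ===== Notes on version B (the rewrite author's own statement) =====
-- stated objective: alternative
-- what changed: Replaces A's per-distance dict buckets plus parity union-find (recursive path compression, union by size) with one flat edge list, a single stable sort by distance, and a quick-find scan that keeps explicit component ids and 2-colors, relabelling a whole component on each merge.
import Mathlib
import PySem

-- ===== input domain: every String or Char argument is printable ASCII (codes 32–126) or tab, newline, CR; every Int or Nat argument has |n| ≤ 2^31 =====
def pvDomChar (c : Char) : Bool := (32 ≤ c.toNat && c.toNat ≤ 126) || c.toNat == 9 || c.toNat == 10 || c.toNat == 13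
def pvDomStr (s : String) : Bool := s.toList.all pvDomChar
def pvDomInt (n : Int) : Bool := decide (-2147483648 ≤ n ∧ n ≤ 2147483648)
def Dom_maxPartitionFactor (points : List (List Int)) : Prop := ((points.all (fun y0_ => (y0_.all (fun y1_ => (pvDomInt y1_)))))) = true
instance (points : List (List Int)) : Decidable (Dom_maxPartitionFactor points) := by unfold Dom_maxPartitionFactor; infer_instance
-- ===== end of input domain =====

-- B is an alternative implementation: one flat edge list with a single stable sort by
-- distance and a quick-find/recolor scan, instead of A's per-distance dict buckets and
-- parity union-find (path compression + union by size).  Similar cost, no speed claim.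

-- ===== PORT A =====

-- the tuple unpack 'x, y = p' of a 2-element point (Pre_ guarantees length 2)
def ptX (p : List Int) : Int := PySem.List.pyGetD p 0 0
def ptY (p : List Int) : Int := PySem.List.pyGetD p 1 0

-- class UF_Parity: the three attribute lists
structure UF where
  uid : List Int   -- self.id
  cnt : List Int   -- self.set_member_cnt
  ux  : List Int   -- self.x
  deriving Repr, DecidableEq

-- def find(self, up) — Python's recursion; fuel = number of nodes is enough for every
-- state the algorithm reaches (parent chains are acyclic and shorter than n)
def ufFind : Nat → UF → Int → UF × Int
  | 0, st, up => (st, up)   -- fuel exhausted: unreachable on states reached under Pre_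
  | f+1, st, up =>
    if PySem.List.pyGetD st.uid up 0 ≠ up then
      let r := ufFind f st (PySem.List.pyGetD st.uid up 0)
      let st1 := r.1
      let deep := r.2
      -- self.x[up] ^= self.x[self.id[up]]
      let st2 : UF := { st1 with ux := (PySem.List.pySetD st1.ux up
        (PySem.Int.bxor (PySem.List.pyGetD st1.ux up 0)
          (PySem.List.pyGetD st1.ux (PySem.List.pyGetD st1.uid up 0) 0))) }
      -- self.id[up] = deep
      let st3 : UF := { st2 with uid := PySem.List.pySetD st2.uid up deep }
      (st3, PySem.List.pyGetD st3.uid up 0)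
    else (st, PySem.List.pyGetD st.uid up 0)

-- def union(self, n1, n2, w = 1)
def ufUnion (st : UF) (n1 n2 w : Int) : UF × Bool :=
  let r1 := ufFind st.uid.length st n1
  let st1 := r1.1
  let f1 := r1.2
  let r2 := ufFind st1.uid.length st1 n2
  let st2 := r2.1
  let f2 := r2.2
  if f1 = f2 then
    (st2, PySem.Int.bxor (PySem.List.pyGetD st2.ux n1 0) (PySem.List.pyGetD st2.ux n2 0) == w)
  else
    let s := if PySem.List.pyGetD st2.cnt f1 0 > PySem.List.pyGetD st2.cnt f2 0
             then (f2, f1, n2, n1) else (f1, f2, n1, n2)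
    let g1 := s.1
    let g2 := s.2.1
    let m1 := s.2.2.1
    let m2 := s.2.2.2
    let st3 : UF := { st2 with uid := PySem.List.pySetD st2.uid g1 g2 }
    let st4 : UF := { st3 with ux := (PySem.List.pySetD st3.ux g1
      (PySem.Int.bxor (PySem.Int.bxor (PySem.List.pyGetD st3.ux m1 0) (PySem.List.pyGetD st3.ux m2 0)) w)) }
    let st5 : UF := { st4 with cnt := (PySem.List.pySetD st4.cnt g2
      (PySem.List.pyGetD st4.cnt g2 0 + PySem.List.pyGetD st4.cnt g1 0)) }
    (st5, true)

-- dis_bucket = defaultdict(list); the double enumerate loop filling it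
def buildBucket (points : List (List Int)) : PySem.Dict Int (List (Int × Int)) :=
  (PySem.List.enumerate points).foldl (fun d p1 =>
    (PySem.List.enumerate (PySem.List.slice points none (some p1.1))).foldl (fun d2 p2 =>
      d2.modify (|ptX p1.2 - ptX p2.2| + |ptY p1.2 - ptY p2.2|) [] (· ++ [(p1.1, p2.1)])) d)
    PySem.Dict.empty

-- the inner 'for p1i, p2i in dis_bucket[dis]' loop with its early return
def runPairs (st : UF) (pairs : List (Int × Int)) : UF × Bool :=
  match pairs with
  | [] => (st, true)
  | p :: rest =>
    let r := ufUnion st p.1 p.2 1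
    if r.2 then runPairs r.1 rest else (r.1, false)

-- the outer 'for dis in sorted(dis_bucket.keys())' loop
def runKeys (st : UF) (bucket : PySem.Dict Int (List (Int × Int))) (keys : List Int) : Int :=
  match keys with
  | [] => 0
  | d :: rest =>
    let r := runPairs st (bucket.getD d [])
    if r.2 then runKeys r.1 bucket rest else d

def maxPartitionFactor (points : List (List Int)) : Int :=
  let bucket := buildBucket points
  let uf : UF := ⟨PySem.List.pyRange 0 (PySem.List.len points) 1,
                  List.replicate points.length 1, List.replicate points.length 0⟩
  runKeys uf bucket (PySem.List.sorted bucket.keys (fun k => k) false)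

-- ===== PORT B =====

-- the scan over the sorted edge list with quick-find component/color lists
def bScan (n : Int) (comp color : List Int) : List (Int × Int × Int) → Int
  | [] => 0
  | e :: rest =>
    if PySem.List.pyGetD comp e.2.1 0 = PySem.List.pyGetD comp e.2.2 0 then
      if PySem.List.pyGetD color e.2.1 0 = PySem.List.pyGetD color e.2.2 0 then e.1
      else bScan n comp color rest
    else
      let ci := PySem.List.pyGetD comp e.2.1 0
      let cj := PySem.List.pyGetD comp e.2.2 0
      let flip := PySem.Int.bxor (PySem.Int.bxor (PySem.List.pyGetD color e.2.1 0) (PySem.List.pyGetD color e.2.2 0)) 1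
      let s := (PySem.List.pyRange 0 n 1).foldl (fun (s : List Int × List Int) k =>
        if PySem.List.pyGetD s.1 k 0 = ci then
          (PySem.List.pySetD s.1 k cj,
           PySem.List.pySetD s.2 k (PySem.Int.bxor (PySem.List.pyGetD s.2 k 0) flip))
        else s) (comp, color)
      bScan n s.1 s.2 rest

def maxPartitionFactor_alt (points : List (List Int)) : Int :=
  let n : Int := PySem.List.len points
  let edges := (PySem.List.pyRange 0 n 1).foldl (fun acc i =>
    let p := PySem.List.pyGetD points i []
    (PySem.List.pyRange 0 i 1).foldl (fun acc2 j =>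
      let q := PySem.List.pyGetD points j []
      acc2 ++ [(|ptX p - ptX q| + |ptY p - ptY q|, i, j)]) acc) []
  let sortedEdges := PySem.List.sorted edges (fun e => e.1) false
  bScan n (PySem.List.pyRange 0 n 1) (List.replicate points.length 0) sortedEdges

-- ===== PRECONDITION & SPEC =====
-- Pre_ excludes points that are not 2-element lists: on those Python A (and B) raise
-- ValueError at the tuple unpack 'p1x, p1y = …'.
def Pre_maxPartitionFactor (points : List (List Int)) : Prop := ∀ p ∈ points, p.length = 2
instance (points : List (List Int)) : Decidable (Pre_maxPartitionFactor points) := by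
  unfold Pre_maxPartitionFactor; infer_instance

def pvWitness_maxPartitionFactor : List (List Int) := [[0, 0], [2, 1], [1, 3]]

def Spec_maxPartitionFactor (points : List (List Int)) (out : Int) : Prop := out = maxPartitionFactor_alt points
instance (points : List (List Int)) (out : Int) : Decidable (Spec_maxPartitionFactor points out) := by
  unfold Spec_maxPartitionFactor; infer_instance

-- ===== CLAIM (what is proved, stated in full; the proofs are below) =====
def Claim_equal_maxPartitionFactor : Prop := ∀ (points : List (List Int)), Dom_maxPartitionFactor points → Pre_maxPartitionFactor points → Spec_maxPartitionFactor points (maxPartitionFactor points)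

-- ===== LEMMAS AND PROOFS =====


def pvBit (a : Int) : Prop := a = 0 ∨ a = 1

lemma pvBit_bxor {a b : Int} (ha : pvBit a) (hb : pvBit b) : pvBit (PySem.Int.bxor a b) := by
  rcases ha with rfl|rfl <;> rcases hb with rfl|rfl <;> simp [pvBit] <;> decide

lemma pvBxor_zero_right {a : Int} (ha : pvBit a) : PySem.Int.bxor a 0 = a := by
  rcases ha with rfl|rfl <;> decide

lemma pvBxor_zero_left {a : Int} (ha : pvBit a) : PySem.Int.bxor 0 a = a := by
  rcases ha with rfl|rfl <;> decide

lemma pvBxor_comm {a b : Int} (ha : pvBit a) (hb : pvBit b) :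
    PySem.Int.bxor a b = PySem.Int.bxor b a := by
  rcases ha with rfl|rfl <;> rcases hb with rfl|rfl <;> decide

lemma pvBxor_assoc {a b c : Int} (ha : pvBit a) (hb : pvBit b) (hc : pvBit c) :
    PySem.Int.bxor a (PySem.Int.bxor b c) = PySem.Int.bxor (PySem.Int.bxor a b) c := by
  rcases ha with rfl|rfl <;> rcases hb with rfl|rfl <;> rcases hc with rfl|rfl <;> decide

lemma pvBxor_eq_zero_iff {a b : Int} (ha : pvBit a) (hb : pvBit b) :
    PySem.Int.bxor a b = 0 ↔ a = b := by
  rcases ha with rfl|rfl <;> rcases hb with rfl|rfl <;> simp <;> decide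

lemma pvBxor_eq_one_iff {a b : Int} (ha : pvBit a) (hb : pvBit b) :
    PySem.Int.bxor a b = 1 ↔ a ≠ b := by
  rcases ha with rfl|rfl <;> rcases hb with rfl|rfl <;> simp <;> decide

def pvParent (uid : List Int) (i : Nat) : Nat := (uid.getD i 0).toNat

def pvDep (uid : List Int) : Nat → Nat → Option Nat
  | 0, _ => none
  | f+1, i => if pvParent uid i = i then some 0 else (pvDep uid f (pvParent uid i)).map (· + 1)

def pvRootF (uid : List Int) : Nat → Nat → Nat
  | 0, i => i
  | f+1, i => if pvParent uid i = i then i else pvRootF uid f (pvParent uid i)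

def pvParF (uid x : List Int) : Nat → Nat → Int
  | 0, _ => 0
  | f+1, i => if pvParent uid i = i then 0
              else PySem.Int.bxor (x.getD i 0) (pvParF uid x f (pvParent uid i))

lemma pvDep_succ (uid : List Int) (f i : Nat) :
    pvDep uid (f+1) i = if pvParent uid i = i then some 0 else (pvDep uid f (pvParent uid i)).map (· + 1) := rfl

lemma pvRootF_succ (uid : List Int) (f i : Nat) :
    pvRootF uid (f+1) i = if pvParent uid i = i then i else pvRootF uid f (pvParent uid i) := rfl

lemma pvParF_succ (uid x : List Int) (f i : Nat) :
    pvParF uid x (f+1) i = if pvParent uid i = i then 0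
      else PySem.Int.bxor (x.getD i 0) (pvParF uid x f (pvParent uid i)) := rfl

lemma pvDep_stable (uid : List Int) : ∀ (f i d : Nat), pvDep uid f i = some d →
    d < f ∧ ∀ f', d < f' → pvDep uid f' i = some d ∧
      pvRootF uid f' i = pvRootF uid (d+1) i ∧
      ∀ x : List Int, pvParF uid x f' i = pvParF uid x (d+1) i := by
  intro f
  induction f with
  | zero => intro i d h; simp [pvDep] at h
  | succ f ih =>
    intro i d h
    by_cases hr : pvParent uid i = i
    · simp only [pvDep, hr, if_pos, if_true] at h
      obtain rfl : (0 : Nat) = d := by simpa using h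
      refine ⟨Nat.succ_pos f, ?_⟩
      intro f' hf'
      obtain ⟨g, rfl⟩ := Nat.exists_eq_add_of_lt hf'
      simp [pvDep, pvRootF, pvParF, hr]
    · simp only [pvDep, hr, if_neg, if_false, Option.map_eq_some_iff] at h
      obtain ⟨e, he, rfl⟩ := h
      obtain ⟨hef, hstab⟩ := ih _ _ he
      refine ⟨by omega, ?_⟩
      intro f' hf'
      obtain ⟨g, rfl⟩ : ∃ g, f' = g + 1 := ⟨f' - 1, by omega⟩
      have hge : e < g := by omega
      obtain ⟨hg1, hg2, hg3⟩ := hstab g hge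
      obtain ⟨he1, he2, he3⟩ := hstab (e+1) (Nat.lt_succ_self e)
      refine ⟨?_, ?_, ?_⟩
      · rw [pvDep_succ, if_neg hr, hg1]; rfl
      · rw [pvRootF_succ, if_neg hr, pvRootF_succ, if_neg hr, hg2]
      · intro x
        rw [pvParF_succ, if_neg hr, pvParF_succ uid x (e+1), if_neg hr, hg3 x]

lemma pvDep_pos {uid : List Int} {f i d : Nat} (h : pvDep uid f i = some d) : 0 < f := by
  cases f with
  | zero => simp [pvDep] at h
  | succ f => exact Nat.succ_pos f

lemma pvDep_iter (uid : List Int) {f i d : Nat} (h : pvDep uid f i = some d) :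
    ∀ k, k ≤ d → pvDep uid f ((fun j => pvParent uid j)^[k] i) = some (d - k) := by
  intro k
  induction k with
  | zero => intro _; simpa using h
  | succ k ih =>
    intro hk
    have hk' : k ≤ d := by omega
    have hprev := ih hk'
    have hfpos : 0 < f := pvDep_pos h
    obtain ⟨g, rfl⟩ : ∃ g, f = g + 1 := ⟨f - 1, by omega⟩
    have hdk : d - k ≠ 0 := by omega
    by_cases hr : pvParent uid ((fun j => pvParent uid j)^[k] i) = ((fun j => pvParent uid j)^[k] i)
    · rw [pvDep_succ, if_pos hr] at hprev
      exact absurd (by simpa using hprev) (by omega)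
    · rw [pvDep_succ, if_neg hr] at hprev
      rw [Option.map_eq_some_iff] at hprev
      obtain ⟨e, he, hed⟩ := hprev
      have : e = d - (k+1) := by omega
      subst this
      rw [Function.iterate_succ_apply']
      have := (pvDep_stable uid _ _ _ he).2 (g+1) (by have := (pvDep_stable uid _ _ _ he).1; omega)
      exact this.1

lemma pvIter_lt {uid : List Int} {n : Nat} (hb : ∀ i, i < n → pvParent uid i < n)
    {i : Nat} (hi : i < n) : ∀ k, ((fun j => pvParent uid j)^[k] i) < n := by
  intro k
  induction k with
  | zero => simpa using hi
  | succ k ih => rw [Function.iterate_succ_apply']; exact hb _ ih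

lemma pvDep_lt_n {uid : List Int} {n : Nat} (hb : ∀ i, i < n → pvParent uid i < n)
    {f i d : Nat} (hi : i < n) (h : pvDep uid f i = some d) : d < n := by
  have hinj : Set.InjOn (fun k => (fun j => pvParent uid j)^[k] i) (Finset.range (d+1)) := by
    intro k1 hk1 k2 hk2 heq
    simp only [Finset.coe_range, Set.mem_Iio] at hk1 hk2
    have h1 := pvDep_iter uid h k1 (by omega)
    have h2 := pvDep_iter uid h k2 (by omega)
    have heq' : (fun j => pvParent uid j)^[k1] i = (fun j => pvParent uid j)^[k2] i := heq
    rw [heq'] at h1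
    rw [h1] at h2
    have : d - k1 = d - k2 := by exact Option.some_injective _ h2
    omega
  have hmaps : ∀ k ∈ Finset.range (d+1), (fun j => pvParent uid j)^[k] i ∈ Finset.range n := by
    intro k _
    simpa using pvIter_lt hb hi k
  have := Finset.card_le_card_of_injOn _ hmaps hinj
  simp at this
  omega

lemma pvGetD_set_self {l : List Int} {u : Nat} (h : u < l.length) (v : Int) :
    (l.set u v).getD u 0 = v := by
  simp [List.getD, h]

lemma pvGetD_set_ne {l : List Int} {u k : Nat} (h : k ≠ u) (v : Int) :
    (l.set u v).getD k 0 = l.getD k 0 := by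
  simp [List.getD, List.getElem?_set, Ne.symm h]

lemma pvParent_set {uid : List Int} {u : Nat} (hu : u < uid.length) (r : Int) (k : Nat) :
    pvParent (uid.set u r) k = if k = u then r.toNat else pvParent uid k := by
  by_cases hk : k = u
  · subst hk; unfold pvParent; rw [pvGetD_set_self hu]; simp
  · unfold pvParent; rw [pvGetD_set_ne hk]; simp [hk]

lemma pvRoot_of_fix {uid : List Int} {n i : Nat} (hn : 0 < n) (hr : pvParent uid i = i) :
    pvRootF uid n i = i ∧ (∀ x, pvParF uid x n i = 0) ∧ pvDep uid n i = some 0 := by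
  obtain ⟨m, rfl⟩ : ∃ m, n = m + 1 := ⟨n - 1, by omega⟩
  refine ⟨?_, ?_, ?_⟩
  · rw [pvRootF_succ, if_pos hr]
  · intro x; rw [pvParF_succ, if_pos hr]
  · rw [pvDep_succ, if_pos hr]

lemma pvStep {uid : List Int} {n i d : Nat} (hnr : pvParent uid i ≠ i)
    (hd : pvDep uid n i = some d) :
    1 ≤ d ∧ pvDep uid n (pvParent uid i) = some (d-1) ∧
    pvRootF uid n i = pvRootF uid n (pvParent uid i) ∧
    ∀ x, pvParF uid x n i = PySem.Int.bxor (x.getD i 0) (pvParF uid x n (pvParent uid i)) := by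
  obtain ⟨m, rfl⟩ : ∃ m, n = m + 1 := ⟨n - 1, by have := pvDep_pos hd; omega⟩
  rw [pvDep_succ, if_neg hnr, Option.map_eq_some_iff] at hd
  obtain ⟨e, he, rfl⟩ := hd
  have hst := pvDep_stable uid _ _ _ he
  have hem : e < m := hst.1
  have hm := hst.2 m hem
  have hn := hst.2 (m+1) (by omega)
  refine ⟨by omega, by simpa using hn.1, ?_, ?_⟩
  · rw [pvRootF_succ, if_neg hnr, hm.2.1, ← hn.2.1]
  · intro x
    rw [pvParF_succ, if_neg hnr, hm.2.2 x, ← hn.2.2 x]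

lemma pvRootF_isRoot {uid : List Int} {n : Nat} (hb : ∀ i, i < n → pvParent uid i < n) :
    ∀ d i, i < n → pvDep uid n i = some d →
      pvParent uid (pvRootF uid n i) = pvRootF uid n i ∧ pvRootF uid n i < n ∧
      pvDep uid n (pvRootF uid n i) = some 0 := by
  intro d
  induction d using Nat.strong_induction_on with
  | _ d ih =>
    intro i hi hd
    by_cases hr : pvParent uid i = i
    · obtain ⟨hroot, _, hdep0⟩ := pvRoot_of_fix (n := n) (by omega) hr
      rw [hroot]
      exact ⟨hr, hi, hdep0⟩
    · obtain ⟨hd1, hdp, hrp, _⟩ := pvStep hr hd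
      have := ih (d-1) (by omega) (pvParent uid i) (hb _ hi) hdp
      rw [hrp]
      exact this

lemma pvRootF_ne_self {uid : List Int} {n i d : Nat} (hb : ∀ i, i < n → pvParent uid i < n)
    (hi : i < n) (hnr : pvParent uid i ≠ i) (hd : pvDep uid n i = some d) :
    pvRootF uid n i ≠ i := by
  intro hcontra
  obtain ⟨_, _, hdep0⟩ := pvRootF_isRoot hb d i hi hd
  rw [hcontra] at hdep0
  rw [hdep0] at hd
  obtain ⟨h1, _⟩ := pvStep hnr hdep0
  omega

lemma pvParF_bit {uid x : List Int} {n : Nat} (hb : ∀ i, i < n → pvParent uid i < n)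
    (hx : ∀ i, i < n → pvBit (x.getD i 0)) :
    ∀ f i, i < n → pvBit (pvParF uid x f i) := by
  intro f
  induction f with
  | zero => intro i _; exact Or.inl rfl
  | succ f ihf =>
    intro i hi
    rw [pvParF_succ]
    by_cases hr : pvParent uid i = i
    · rw [if_pos hr]; exact Or.inl rfl
    · rw [if_neg hr]
      exact pvBit_bxor (hx i hi) (ihf _ (hb _ hi))

-- values via stability at canonical fuel
lemma pvFuel_n {uid : List Int} {n k e : Nat} (h : pvDep uid n k = some (e+1))
    (hp : e + 1 < n) :
    pvRootF uid n k = pvRootF uid (n+1) k ∧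
    ∀ x, pvParF uid x n k = pvParF uid x (n+1) k := by
  have hst := pvDep_stable uid _ _ _ h
  have ha := hst.2 n hp
  have hb' := hst.2 (n+1) (by omega)
  exact ⟨ha.2.1.trans hb'.2.1.symm, fun x => (ha.2.2 x).trans (hb'.2.2 x).symm⟩

lemma pvCompress {uid x : List Int} {n : Nat}
    (hlen : uid.length = n) (hxlen : x.length = n)
    (hb : ∀ i, i < n → pvParent uid i < n)
    (hx : ∀ i, i < n → pvBit (x.getD i 0))
    {u : Nat} (hu : u < n) (hnr : pvParent uid u ≠ u)
    (hdu : (pvDep uid n u).isSome) :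
    ∀ d k, k < n → pvDep uid n k = some d →
      (∃ d', d' ≤ d ∧ pvDep (uid.set u (pvRootF uid n u : Int)) n k = some d') ∧
      pvRootF (uid.set u (pvRootF uid n u : Int)) n k = pvRootF uid n k ∧
      pvParF (uid.set u (pvRootF uid n u : Int)) (x.set u (pvParF uid x n u)) n k
        = pvParF uid x n k := by
  obtain ⟨du, hdu⟩ := Option.isSome_iff_exists.mp hdu
  obtain ⟨hroot_r, hr_lt, hdep_r⟩ := pvRootF_isRoot hb du u hu hdu
  have hru : pvRootF uid n u ≠ u := pvRootF_ne_self hb hu hnr hdu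
  set r := pvRootF uid n u with hrdef
  set uid' := uid.set u (r : Int) with huid'
  set x' := x.set u (pvParF uid x n u) with hx'
  have hpar' : ∀ k, pvParent uid' k = if k = u then r else pvParent uid k := by
    intro k
    rw [huid', pvParent_set (by omega) _ k]
    simp
  have hb' : ∀ i, i < n → pvParent uid' i < n := by
    intro i hi; rw [hpar']; split
    · exact hr_lt
    · exact hb i hi
  have hxg : ∀ k, k ≠ u → x'.getD k 0 = x.getD k 0 := fun k hk => pvGetD_set_ne hk _
  have hxu : x'.getD u 0 = pvParF uid x n u := pvGetD_set_self (by omega) _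
  -- r is still a root in uid'
  have hroot_r' : pvParent uid' r = r := by rw [hpar', if_neg hru]; exact hroot_r
  intro d
  induction d using Nat.strong_induction_on with
  | _ d ih =>
    intro k hk hd
    by_cases hku : k = u
    · subst hku
      have hp' : pvParent uid' k ≠ k := by rw [hpar', if_pos rfl]; exact hru
      have hdr' : pvDep uid' n r = some 0 := (pvRoot_of_fix (by omega) hroot_r').2.2
      have hd1 : pvDep uid' (n+1) k = some 1 := by
        rw [pvDep_succ, if_neg hp', hpar', if_pos rfl, hdr']; rfl
      have hlt : (1:Nat) < n + 1 := by omega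
      have hstab := (pvDep_stable uid' _ _ _ hd1).2
      have hd1' : pvDep uid' n k = some 1 := by
        refine (hstab n ?_).1
        have hd1n := pvDep_lt_n hb' (f := n+1) hu hd1
        omega
      refine ⟨⟨1, ?_, hd1'⟩, ?_, ?_⟩
      · obtain ⟨h1, _⟩ := pvStep hnr hd; omega
      · have e1 : pvRootF uid' (n+1) k = pvRootF uid' n r := by
          rw [pvRootF_succ, if_neg hp', hpar', if_pos rfl]
        have e2 : pvRootF uid' n r = r := (pvRoot_of_fix (by omega) hroot_r').1
        have e3 : pvRootF uid' n k = pvRootF uid' (n+1) k :=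
          (pvFuel_n (e := 0) hd1' (by have := pvDep_lt_n hb' (f := n+1) hu hd1; omega)).1
        rw [e3, e1, e2]
      · have e1 : pvParF uid' x' (n+1) k = PySem.Int.bxor (x'.getD k 0) (pvParF uid' x' n r) := by
          rw [pvParF_succ, if_neg hp', hpar', if_pos rfl]
        have e2 : pvParF uid' x' n r = 0 := (pvRoot_of_fix (by omega) hroot_r').2.1 x'
        have e3 : pvParF uid' x' n k = pvParF uid' x' (n+1) k :=
          (pvFuel_n (e := 0) hd1' (by have := pvDep_lt_n hb' (f := n+1) hu hd1; omega)).2 x'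
        rw [e3, e1, e2, hxu]
        exact pvBxor_zero_right (pvParF_bit hb hx n k hk)
    · by_cases hfix : pvParent uid k = k
      · have hfix' : pvParent uid' k = k := by rw [hpar', if_neg hku]; exact hfix
        obtain ⟨hA1, hA2, hA3⟩ := pvRoot_of_fix (n := n) (by omega) hfix
        obtain ⟨hB1, hB2, hB3⟩ := pvRoot_of_fix (n := n) (by omega) hfix'
        refine ⟨⟨0, by omega, hB3⟩, ?_, ?_⟩
        · rw [hA1, hB1]
        · rw [hA3] at hd
          rw [hB2 x', hA2 x]
      · obtain ⟨hd1, hdp, hrp, hpp⟩ := pvStep hfix hd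
        have hp := hb k hk
        obtain ⟨⟨e, he_le, he⟩, hR, hP⟩ := ih (d-1) (by omega) (pvParent uid k) hp hdp
        have hfix' : pvParent uid' k ≠ k := by rw [hpar', if_neg hku]; exact hfix
        have hpar_eq : pvParent uid' k = pvParent uid k := by rw [hpar', if_neg hku]
        have hdk1 : pvDep uid' (n+1) k = some (e+1) := by
          rw [pvDep_succ, if_neg hfix', hpar_eq, he]; rfl
        have hlt : e + 1 < n := by
          have := pvDep_lt_n hb' (f := n+1) hk hdk1; omega
        have hdk : pvDep uid' n k = some (e+1) := ((pvDep_stable uid' _ _ _ hdk1).2 n hlt).1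
        refine ⟨⟨e+1, by omega, hdk⟩, ?_, ?_⟩
        · have e1 : pvRootF uid' (n+1) k = pvRootF uid' n (pvParent uid k) := by
            rw [pvRootF_succ, if_neg hfix', hpar_eq]
          have e3 : pvRootF uid' n k = pvRootF uid' (n+1) k := (pvFuel_n hdk hlt).1
          rw [e3, e1, hR, hrp]
        · have e1 : pvParF uid' x' (n+1) k
              = PySem.Int.bxor (x'.getD k 0) (pvParF uid' x' n (pvParent uid k)) := by
            rw [pvParF_succ, if_neg hfix', hpar_eq]
          have e3 : pvParF uid' x' n k = pvParF uid' x' (n+1) k := (pvFuel_n hdk hlt).2 x'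
          rw [e3, e1, hP, hxg k hku, hpp x]

lemma pvLink {uid x : List Int} {n : Nat}
    (hlen : uid.length = n) (hxlen : x.length = n)
    (hb : ∀ i, i < n → pvParent uid i < n)
    (hx : ∀ i, i < n → pvBit (x.getD i 0))
    {f1 f2 : Nat} (h1 : f1 < n) (h2 : f2 < n) (hr1 : pvParent uid f1 = f1)
    (hr2 : pvParent uid f2 = f2) (hne : f1 ≠ f2) {δ : Int} (hδ : pvBit δ) :
    ∀ d k, k < n → pvDep uid n k = some d →
      (pvDep (uid.set f1 (f2:Int)) n k).isSome ∧
      pvRootF (uid.set f1 (f2:Int)) n k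
        = (if pvRootF uid n k = f1 then f2 else pvRootF uid n k) ∧
      pvParF (uid.set f1 (f2:Int)) (x.set f1 δ) n k
        = (if pvRootF uid n k = f1 then PySem.Int.bxor (pvParF uid x n k) δ
           else pvParF uid x n k) := by
  set uid' := uid.set f1 (f2:Int) with huid'
  set x' := x.set f1 δ with hx'
  have hpar' : ∀ k, pvParent uid' k = if k = f1 then f2 else pvParent uid k := by
    intro k
    rw [huid', pvParent_set (by omega) _ k]
    simp
  have hb' : ∀ i, i < n → pvParent uid' i < n := by
    intro i hi; rw [hpar']; split
    · exact h2
    · exact hb i hi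
  have hxg : ∀ k, k ≠ f1 → x'.getD k 0 = x.getD k 0 := fun k hk => pvGetD_set_ne hk _
  have hxu : x'.getD f1 0 = δ := pvGetD_set_self (by omega) _
  have hfix2' : pvParent uid' f2 = f2 := by rw [hpar', if_neg (Ne.symm hne)]; exact hr2
  intro d
  induction d using Nat.strong_induction_on with
  | _ d ih =>
    intro k hk hd
    by_cases hkf : k = f1
    · subst hkf
      obtain ⟨hA1, hA2, hA3⟩ := pvRoot_of_fix (n := n) (by omega) hr1
      have hp' : pvParent uid' k ≠ k := by rw [hpar', if_pos rfl]; exact Ne.symm hne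
      have hd2 : pvDep uid' n f2 = some 0 := (pvRoot_of_fix (by omega) hfix2').2.2
      have hdk1 : pvDep uid' (n+1) k = some 1 := by
        rw [pvDep_succ, if_neg hp', hpar', if_pos rfl, hd2]; rfl
      have hlt : (1:Nat) < n := by
        have := pvDep_lt_n hb' (f := n+1) hk hdk1; omega
      have hdk : pvDep uid' n k = some 1 := ((pvDep_stable uid' _ _ _ hdk1).2 n hlt).1
      have hself : pvRootF uid n k = k := hA1
      refine ⟨by simp [hdk], ?_, ?_⟩
      · have e1 : pvRootF uid' (n+1) k = pvRootF uid' n f2 := by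
          rw [pvRootF_succ, if_neg hp', hpar', if_pos rfl]
        have e2 : pvRootF uid' n f2 = f2 := (pvRoot_of_fix (by omega) hfix2').1
        have e3 : pvRootF uid' n k = pvRootF uid' (n+1) k := (pvFuel_n (e := 0) hdk hlt).1
        rw [e3, e1, e2, if_pos hself]
      · have e1 : pvParF uid' x' (n+1) k = PySem.Int.bxor (x'.getD k 0) (pvParF uid' x' n f2) := by
          rw [pvParF_succ, if_neg hp', hpar', if_pos rfl]
        have e2 : pvParF uid' x' n f2 = 0 := (pvRoot_of_fix (by omega) hfix2').2.1 x'
        have e3 : pvParF uid' x' n k = pvParF uid' x' (n+1) k := (pvFuel_n (e := 0) hdk hlt).2 x'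
        rw [e3, e1, e2, hxu, if_pos hself, hA2 x]
        rw [pvBxor_zero_right hδ, pvBxor_zero_left hδ]
    · by_cases hfix : pvParent uid k = k
      · have hfix' : pvParent uid' k = k := by rw [hpar', if_neg hkf]; exact hfix
        obtain ⟨hA1, hA2, hA3⟩ := pvRoot_of_fix (n := n) (by omega) hfix
        obtain ⟨hB1, hB2, hB3⟩ := pvRoot_of_fix (n := n) (by omega) hfix'
        have hnf : pvRootF uid n k ≠ f1 := by rw [hA1]; exact hkf
        refine ⟨by simp [hB3], ?_, ?_⟩
        · rw [hA1, hB1, if_neg (by rw [hA1] at hnf; exact hnf)]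
        · rw [hB2 x', hA2 x, if_neg hnf]
      · obtain ⟨hd1, hdp, hrp, hpp⟩ := pvStep hfix hd
        have hp := hb k hk
        obtain ⟨hsome, hR, hP⟩ := ih (d-1) (by omega) (pvParent uid k) hp hdp
        obtain ⟨e, he⟩ := Option.isSome_iff_exists.mp hsome
        have hfix' : pvParent uid' k ≠ k := by rw [hpar', if_neg hkf]; exact hfix
        have hpar_eq : pvParent uid' k = pvParent uid k := by rw [hpar', if_neg hkf]
        have hdk1 : pvDep uid' (n+1) k = some (e+1) := by
          rw [pvDep_succ, if_neg hfix', hpar_eq, he]; rfl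
        have hlt : e + 1 < n := by
          have := pvDep_lt_n hb' (f := n+1) hk hdk1; omega
        have hdk : pvDep uid' n k = some (e+1) := ((pvDep_stable uid' _ _ _ hdk1).2 n hlt).1
        refine ⟨by simp [hdk], ?_, ?_⟩
        · have e1 : pvRootF uid' (n+1) k = pvRootF uid' n (pvParent uid k) := by
            rw [pvRootF_succ, if_neg hfix', hpar_eq]
          have e3 : pvRootF uid' n k = pvRootF uid' (n+1) k := (pvFuel_n hdk hlt).1
          rw [e3, e1, hR, hrp]
        · have e1 : pvParF uid' x' (n+1) k
              = PySem.Int.bxor (x'.getD k 0) (pvParF uid' x' n (pvParent uid k)) := by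
            rw [pvParF_succ, if_neg hfix', hpar_eq]
          have e3 : pvParF uid' x' n k = pvParF uid' x' (n+1) k := (pvFuel_n hdk hlt).2 x'
          rw [e3, e1, hP, hxg k hkf, hpp x, hrp]
          by_cases hcase : pvRootF uid n (pvParent uid k) = f1
          · rw [if_pos hcase, if_pos hcase]
            exact pvBxor_assoc (hx k hk) (pvParF_bit hb hx n _ hp) hδ
          · rw [if_neg hcase, if_neg hcase]

def pvInv (st : UF) (n : Nat) : Prop :=
  st.uid.length = n ∧ st.ux.length = n ∧
  (∀ i, i < n → 0 ≤ st.uid.getD i 0 ∧ st.uid.getD i 0 < (n:Int)) ∧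
  (∀ i, i < n → pvBit (st.ux.getD i 0)) ∧
  (∀ i, i < n → pvParent st.uid i = i → st.ux.getD i 0 = 0) ∧
  (∀ i, i < n → (pvDep st.uid n i).isSome)

lemma pvInv_hb {st : UF} {n : Nat} (h : pvInv st n) : ∀ i, i < n → pvParent st.uid i < n := by
  intro i hi
  have := h.2.2.1 i hi
  unfold pvParent
  omega

lemma pvInv_cast {st : UF} {n : Nat} (h : pvInv st n) {i : Nat} (hi : i < n) :
    st.uid.getD i 0 = ((pvParent st.uid i : Nat) : Int) := by
  have := h.2.2.1 i hi
  unfold pvParent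
  omega

lemma ufFind_succ (f : Nat) (st : UF) (u : Int) :
    ufFind (f+1) st u =
      if PySem.List.pyGetD st.uid u 0 ≠ u then
        ({ uid := PySem.List.pySetD (ufFind f st (PySem.List.pyGetD st.uid u 0)).1.uid u (ufFind f st (PySem.List.pyGetD st.uid u 0)).2,
           cnt := (ufFind f st (PySem.List.pyGetD st.uid u 0)).1.cnt,
           ux := PySem.List.pySetD (ufFind f st (PySem.List.pyGetD st.uid u 0)).1.ux u
             (PySem.Int.bxor (PySem.List.pyGetD (ufFind f st (PySem.List.pyGetD st.uid u 0)).1.ux u 0)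
               (PySem.List.pyGetD (ufFind f st (PySem.List.pyGetD st.uid u 0)).1.ux
                 (PySem.List.pyGetD (ufFind f st (PySem.List.pyGetD st.uid u 0)).1.uid u 0) 0)) },
         PySem.List.pyGetD (PySem.List.pySetD (ufFind f st (PySem.List.pyGetD st.uid u 0)).1.uid u (ufFind f st (PySem.List.pyGetD st.uid u 0)).2) u 0)
      else (st, PySem.List.pyGetD st.uid u 0) := rfl

lemma ufFind_spec {n : Nat} : ∀ (f : Nat) (st : UF) (up : Nat), pvInv st n → up < n →
    (pvDep st.uid f up).isSome →
    (ufFind f st (up : Int)).2 = (pvRootF st.uid n up : Int) ∧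
    pvInv (ufFind f st (up : Int)).1 n ∧
    (ufFind f st (up : Int)).1.cnt = st.cnt ∧
    (∀ k, k < n → pvRootF (ufFind f st (up : Int)).1.uid n k = pvRootF st.uid n k ∧
      pvParF (ufFind f st (up : Int)).1.uid (ufFind f st (up : Int)).1.ux n k
        = pvParF st.uid st.ux n k) ∧
    (∀ k, k < n →
      ((ufFind f st (up : Int)).1.uid.getD k 0 = st.uid.getD k 0 ∧
       (ufFind f st (up : Int)).1.ux.getD k 0 = st.ux.getD k 0) ∨
      ((ufFind f st (up : Int)).1.uid.getD k 0 = (pvRootF st.uid n k : Int) ∧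
       (ufFind f st (up : Int)).1.ux.getD k 0 = pvParF st.uid st.ux n k)) ∧
    (ufFind f st (up : Int)).1.uid.getD up 0 = (pvRootF st.uid n up : Int) ∧
    (ufFind f st (up : Int)).1.ux.getD up 0 = pvParF st.uid st.ux n up := by
  intro f
  induction f with
  | zero => intro st up hInv hup hdep; simp [pvDep] at hdep
  | succ f ih =>
    intro st up hInv hup hdep
    have hb := pvInv_hb hInv
    obtain ⟨hlen, hxlen, hbnd, hbit, hrxz, hdsome⟩ := hInv
    have hgu : st.uid.getD up 0 = ((pvParent st.uid up : Nat) : Int) :=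
      pvInv_cast ⟨hlen, hxlen, hbnd, hbit, hrxz, hdsome⟩ hup
    have hdn := Option.isSome_iff_exists.mp (hdsome up hup)
    obtain ⟨dup, hdup⟩ := hdn
    by_cases hroot : pvParent st.uid up = up
    · have hcond : ¬ (PySem.List.pyGetD st.uid (up:Int) 0 ≠ (up:Int)) := by
        simp only [PySem.List.pyGetD_natCast, ne_eq, not_not, hgu, hroot]
      rw [ufFind_succ, if_neg hcond]
      obtain ⟨hR, hP, hD⟩ := pvRoot_of_fix (n := n) (by omega) hroot
      refine ⟨?_, ⟨hlen, hxlen, hbnd, hbit, hrxz, hdsome⟩, rfl,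
        fun k hk => ⟨rfl, rfl⟩, fun k hk => Or.inl ⟨rfl, rfl⟩, ?_, ?_⟩
      · simp only [PySem.List.pyGetD_natCast]; rw [hgu, hroot, hR]
      · rw [hgu, hroot, hR]
      · rw [hP st.ux]; exact hrxz up hup hroot
    · set p := pvParent st.uid up with hp
      have hplt : p < n := hb up hup
      have harg : PySem.List.pyGetD st.uid (up:Int) 0 = ((p:Nat) : Int) := by
        simp only [PySem.List.pyGetD_natCast]; exact hgu
      have hcond : (PySem.List.pyGetD st.uid (up:Int) 0 ≠ (up:Int)) := by
        rw [harg]; exact_mod_cast hroot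
      have hdepf : (pvDep st.uid f p).isSome := by
        rw [pvDep_succ, if_neg hroot] at hdep
        obtain ⟨d0, hd0⟩ := Option.isSome_iff_exists.mp hdep
        rw [Option.map_eq_some_iff] at hd0
        obtain ⟨e, he, _⟩ := hd0
        rw [hp]
        simp [he]
      obtain ⟨IH1, IH2, IH3, IH4, IH5, IH6, IH7⟩ :=
        ih st p ⟨hlen, hxlen, hbnd, hbit, hrxz, hdsome⟩ hplt hdepf
      obtain ⟨hstep1, hstep2, hrootp, hparrec⟩ := pvStep hroot hdup
      rw [ufFind_succ, if_pos hcond, harg]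
      set R := ufFind f st ((p:Nat) : Int) with hR
      obtain ⟨hlen1, hxlen1, hbnd1, hbit1, hrxz1, hdsome1⟩ := IH2
      have hbp1 : ∀ i, i < n → pvParent R.1.uid i < n :=
        pvInv_hb ⟨hlen1, hxlen1, hbnd1, hbit1, hrxz1, hdsome1⟩
      -- the written-back x value equals the old full parity of up
      have hVal : PySem.Int.bxor (R.1.ux.getD up 0)
          (PySem.List.pyGetD R.1.ux (R.1.uid.getD up 0) 0) = pvParF st.uid st.ux n up := by
        rcases IH5 up hup with ⟨hu1, hu2⟩ | ⟨hu1, hu2⟩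
        · rw [hu1, hgu, hu2]
          simp only [PySem.List.pyGetD_natCast]
          rw [IH7, hparrec st.ux]
        · rw [hu1, hu2]
          simp only [PySem.List.pyGetD_natCast]
          set r := pvRootF st.uid n up with hrr
          obtain ⟨hr1, hr2, hr3⟩ := pvRootF_isRoot hb dup up hup hdup
          have huidr : R.1.uid.getD r 0 = ((r:Nat) : Int) := by
            rcases IH5 r hr2 with ⟨hv1, _⟩ | ⟨hv1, _⟩
            · rw [hv1]
              exact pvInv_cast ⟨hlen, hxlen, hbnd, hbit, hrxz, hdsome⟩ hr2 |>.trans (by rw [← hrr, hr1])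
            · rw [hv1, (pvRoot_of_fix (n := n) (by omega) hr1).1]
          have hparr : pvParent R.1.uid r = r := by unfold pvParent; rw [huidr]; simp
          rw [hrxz1 r hr2 hparr]
          exact pvBxor_zero_right (pvParF_bit hb hbit n up hup)
      have hnr1 : pvParent R.1.uid up ≠ up := by
        rcases IH5 up hup with ⟨hu1, _⟩ | ⟨hu1, _⟩
        · unfold pvParent; rw [hu1, hgu]; simpa using hroot
        · unfold pvParent; rw [hu1]
          have := pvRootF_ne_self hb hup hroot hdup
          simpa using this
      -- the new uid value is the root of up in R.1
      have hRval : R.2 = (pvRootF R.1.uid n up : Int) := by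
        rw [IH1, ← hrootp, (IH4 up hup).1]
      have hParval : PySem.Int.bxor (R.1.ux.getD up 0)
          (PySem.List.pyGetD R.1.ux (R.1.uid.getD up 0) 0) = pvParF R.1.uid R.1.ux n up := by
        rw [hVal, ← (IH4 up hup).2]
      have hcomp := pvCompress hlen1 hxlen1 hbp1 hbit1 hup hnr1 (hdsome1 up hup)
      simp only [PySem.List.pySetD_natCast, PySem.List.pyGetD_natCast]
      rw [hRval, hParval]
      have hcompk : ∀ k, k < n →
          (∃ d', pvDep (R.1.uid.set up (pvRootF R.1.uid n up : Int)) n k = some d') ∧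
          pvRootF (R.1.uid.set up (pvRootF R.1.uid n up : Int)) n k = pvRootF R.1.uid n k ∧
          pvParF (R.1.uid.set up (pvRootF R.1.uid n up : Int))
            (R.1.ux.set up (pvParF R.1.uid R.1.ux n up)) n k = pvParF R.1.uid R.1.ux n k := by
        intro k hk
        obtain ⟨dk, hdk⟩ := Option.isSome_iff_exists.mp (hdsome1 k hk)
        obtain ⟨⟨d', _, hd'⟩, h2', h3'⟩ := hcomp dk k hk hdk
        exact ⟨⟨d', hd'⟩, h2', h3'⟩
      have hrlt : pvRootF R.1.uid n up < n := by
        obtain ⟨du1, hdu1⟩ := Option.isSome_iff_exists.mp (hdsome1 up hup)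
        exact (pvRootF_isRoot hbp1 du1 up hup hdu1).2.1
      have hrne : pvRootF R.1.uid n up ≠ up := by
        obtain ⟨du1, hdu1⟩ := Option.isSome_iff_exists.mp (hdsome1 up hup)
        exact pvRootF_ne_self hbp1 hup hnr1 hdu1
      have hulen : up < R.1.uid.length := by omega
      have huxlen : up < R.1.ux.length := by omega
      refine ⟨?_, ⟨?_, ?_, ?_, ?_, ?_, ?_⟩, IH3, ?_, ?_, ?_, ?_⟩
      · -- returned value
        rw [pvGetD_set_self hulen, (IH4 up hup).1]
      · simpa using hlen1
      · simpa using hxlen1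
      · intro i hi
        by_cases hiu : i = up
        · subst hiu; rw [pvGetD_set_self hulen]
          constructor
          · positivity
          · exact_mod_cast hrlt
        · rw [pvGetD_set_ne hiu]; exact hbnd1 i hi
      · intro i hi
        by_cases hiu : i = up
        · subst hiu; rw [pvGetD_set_self huxlen]
          exact pvParF_bit hbp1 hbit1 n i hi
        · rw [pvGetD_set_ne hiu]; exact hbit1 i hi
      · intro i hi hfix
        by_cases hiu : i = up
        · subst hiu
          rw [pvParent_set hulen _ i, if_pos rfl] at hfix
          simp only [Int.toNat_natCast] at hfix
          exact absurd hfix hrne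
        · rw [pvParent_set hulen _ i, if_neg hiu] at hfix
          rw [pvGetD_set_ne hiu]
          exact hrxz1 i hi hfix
      · intro i hi
        obtain ⟨⟨d', hd'⟩, _, _⟩ := hcompk i hi
        simp [hd']
      · intro k hk
        obtain ⟨_, hcr, hcp⟩ := hcompk k hk
        exact ⟨hcr.trans (IH4 k hk).1, hcp.trans (IH4 k hk).2⟩
      · intro k hk
        by_cases hku : k = up
        · subst hku
          right
          refine ⟨?_, ?_⟩
          · rw [pvGetD_set_self hulen, (IH4 k hk).1]
          · rw [pvGetD_set_self huxlen, (IH4 k hk).2]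
        · rw [pvGetD_set_ne hku, pvGetD_set_ne hku]
          exact IH5 k hk
      · rw [pvGetD_set_self hulen, (IH4 up hup).1]
      · rw [pvGetD_set_self huxlen, (IH4 up hup).2]

lemma ufUnion_eq (st : UF) (n1 n2 w : Int) :
    ufUnion st n1 n2 w =
      (let F1 := ufFind st.uid.length st n1
       let F2 := ufFind F1.1.uid.length F1.1 n2
       if F1.2 = F2.2 then
         (F2.1, PySem.Int.bxor (PySem.List.pyGetD F2.1.ux n1 0) (PySem.List.pyGetD F2.1.ux n2 0) == w)
       else
         let s := if PySem.List.pyGetD F2.1.cnt F1.2 0 > PySem.List.pyGetD F2.1.cnt F2.2 0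
                  then (F2.2, F1.2, n2, n1) else (F1.2, F2.2, n1, n2)
         ({ uid := PySem.List.pySetD F2.1.uid s.1 s.2.1,
            cnt := PySem.List.pySetD F2.1.cnt s.2.1
              (PySem.List.pyGetD F2.1.cnt s.2.1 0 + PySem.List.pyGetD F2.1.cnt s.1 0),
            ux := PySem.List.pySetD F2.1.ux s.1
              (PySem.Int.bxor (PySem.Int.bxor (PySem.List.pyGetD F2.1.ux s.2.2.1 0)
                (PySem.List.pyGetD F2.1.ux s.2.2.2 0)) w) },
          true)) := rfl

lemma pvRootStays {st : UF} {n r : Nat} (hInv : pvInv st n) (hr : pvParent st.uid r = r)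
    (hrn : r < n) {v : Int}
    (hC4 : v = st.uid.getD r 0 ∨ v = (pvRootF st.uid n r : Int)) :
    v = ((r : Nat) : Int) := by
  have hval : st.uid.getD r 0 = ((r:Nat) : Int) := by
    rw [pvInv_cast hInv hrn, hr]
  rcases hC4 with h | h
  · rw [h, hval]
  · rw [h, (pvRoot_of_fix (n := n) (by omega) hr).1]


lemma pvLinkState {n : Nat} (stF : UF) (hInvF : pvInv stF n)
    (rs rb : Nat) (hrs : rs < n) (hrb : rb < n) (hfs : pvParent stF.uid rs = rs)
    (hfb : pvParent stF.uid rb = rb) (hne : rs ≠ rb) (δ : Int) (hδ : pvBit δ)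
    (cnt' : List Int) :
    pvInv ⟨stF.uid.set rs ((rb : Nat) : Int), cnt', stF.ux.set rs δ⟩ n ∧
    ∀ k, k < n →
      pvRootF (stF.uid.set rs ((rb : Nat) : Int)) n k
        = (if pvRootF stF.uid n k = rs then rb else pvRootF stF.uid n k) ∧
      pvParF (stF.uid.set rs ((rb : Nat) : Int)) (stF.ux.set rs δ) n k
        = (if pvRootF stF.uid n k = rs then PySem.Int.bxor (pvParF stF.uid stF.ux n k) δ
           else pvParF stF.uid stF.ux n k) := by
  have hb := pvInv_hb hInvF
  obtain ⟨hlen, hxlen, hbnd, hbit, hrxz, hdsome⟩ := hInvF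
  have hlink := pvLink hlen hxlen hb hbit hrs hrb hfs hfb hne hδ
  have hlink' : ∀ k, k < n →
      (pvDep (stF.uid.set rs ((rb : Nat) : Int)) n k).isSome ∧
      pvRootF (stF.uid.set rs ((rb : Nat) : Int)) n k
        = (if pvRootF stF.uid n k = rs then rb else pvRootF stF.uid n k) ∧
      pvParF (stF.uid.set rs ((rb : Nat) : Int)) (stF.ux.set rs δ) n k
        = (if pvRootF stF.uid n k = rs then PySem.Int.bxor (pvParF stF.uid stF.ux n k) δ
           else pvParF stF.uid stF.ux n k) := by
    intro k hk
    obtain ⟨dk, hdk⟩ := Option.isSome_iff_exists.mp (hdsome k hk)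
    exact hlink dk k hk hdk
  have hrslen : rs < stF.uid.length := by omega
  have hrsxlen : rs < stF.ux.length := by omega
  refine ⟨⟨by simpa using hlen, by simpa using hxlen, ?_, ?_, ?_, fun k hk => (hlink' k hk).1⟩,
    fun k hk => (hlink' k hk).2⟩
  · intro k hk
    by_cases hks : k = rs
    · subst hks; rw [pvGetD_set_self hrslen]
      constructor
      · positivity
      · exact_mod_cast hrb
    · rw [pvGetD_set_ne hks]; exact hbnd k hk
  · intro k hk
    by_cases hks : k = rs
    · subst hks; rw [pvGetD_set_self hrsxlen]; exact hδ
    · rw [pvGetD_set_ne hks]; exact hbit k hk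
  · intro k hk hfix
    by_cases hks : k = rs
    · subst hks
      rw [pvParent_set hrslen _ k, if_pos rfl] at hfix
      simp only [Int.toNat_natCast] at hfix
      exact absurd hfix.symm hne
    · rw [pvParent_set hrslen _ k, if_neg hks] at hfix
      rw [pvGetD_set_ne hks]
      exact hrxz k hk hfix

lemma ufUnion_spec {n : Nat} (st : UF) (hInv : pvInv st n) (i j : Nat) (hi : i < n) (hj : j < n) :
    pvInv (ufUnion st (i:Int) (j:Int) 1).1 n ∧
    (pvRootF st.uid n i = pvRootF st.uid n j →
      ((ufUnion st (i:Int) (j:Int) 1).2 = true ↔ pvParF st.uid st.ux n i ≠ pvParF st.uid st.ux n j) ∧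
      (∀ k, k < n → pvRootF (ufUnion st (i:Int) (j:Int) 1).1.uid n k = pvRootF st.uid n k ∧
        pvParF (ufUnion st (i:Int) (j:Int) 1).1.uid (ufUnion st (i:Int) (j:Int) 1).1.ux n k
          = pvParF st.uid st.ux n k)) ∧
    (pvRootF st.uid n i ≠ pvRootF st.uid n j →
      (ufUnion st (i:Int) (j:Int) 1).2 = true ∧ ∃ rs rb : Nat,
        ((rs = pvRootF st.uid n i ∧ rb = pvRootF st.uid n j) ∨
         (rs = pvRootF st.uid n j ∧ rb = pvRootF st.uid n i)) ∧
        (∀ k, k < n →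
          pvRootF (ufUnion st (i:Int) (j:Int) 1).1.uid n k
            = (if pvRootF st.uid n k = rs then rb else pvRootF st.uid n k) ∧
          pvParF (ufUnion st (i:Int) (j:Int) 1).1.uid (ufUnion st (i:Int) (j:Int) 1).1.ux n k
            = (if pvRootF st.uid n k = rs then
                 PySem.Int.bxor (pvParF st.uid st.ux n k)
                   (PySem.Int.bxor (PySem.Int.bxor (pvParF st.uid st.ux n i)
                     (pvParF st.uid st.ux n j)) 1)
               else pvParF st.uid st.ux n k))) := by
  have hb := pvInv_hb hInv
  have hlen := hInv.1
  obtain ⟨S1, S2, S3, S4, S5, S6, S7⟩ :=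
    ufFind_spec (n := n) st.uid.length st i hInv hi (by rw [hlen]; exact hInv.2.2.2.2.2 i hi)
  set F1 := ufFind st.uid.length st (i:Int) with hF1
  have hlen1 : F1.1.uid.length = n := S2.1
  obtain ⟨T1, T2, T3, T4, T5, T6, T7⟩ :=
    ufFind_spec (n := n) F1.1.uid.length F1.1 j S2 hj (by rw [hlen1]; exact S2.2.2.2.2.2 j hj)
  set F2 := ufFind F1.1.uid.length F1.1 (j:Int) with hF2
  have hlen2 : F2.1.uid.length = n := T2.1
  have hxlen2 : F2.1.ux.length = n := T2.2.1
  have hb2 := pvInv_hb T2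
  -- canonical values after the two finds
  have hC3 : ∀ k, k < n → pvRootF F2.1.uid n k = pvRootF st.uid n k ∧
      pvParF F2.1.uid F2.1.ux n k = pvParF st.uid st.ux n k := by
    intro k hk
    exact ⟨(T4 k hk).1.trans (S4 k hk).1, (T4 k hk).2.trans (S4 k hk).2⟩
  have hxj : F2.1.ux.getD j 0 = pvParF st.uid st.ux n j := by
    rw [T7, (S4 j hj).2]
  have hxi : F2.1.ux.getD i 0 = pvParF st.uid st.ux n i := by
    rcases T5 i hi with ⟨_, h2⟩ | ⟨_, h2⟩
    · rw [h2, S7]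
    · rw [h2, (S4 i hi).2]
  have hret1 : F1.2 = (pvRootF st.uid n i : Int) := S1
  have hret2 : F2.2 = (pvRootF st.uid n j : Int) := by
    rw [T1, (S4 j hj).1]
  have hC4' : ∀ k, k < n →
      F2.1.uid.getD k 0 = st.uid.getD k 0 ∨ F2.1.uid.getD k 0 = (pvRootF st.uid n k : Int) := by
    intro k hk
    rcases T5 k hk with ⟨h1, _⟩ | ⟨h1, _⟩
    · rcases S5 k hk with ⟨g1, _⟩ | ⟨g1, _⟩
      · exact Or.inl (h1.trans g1)
      · exact Or.inr (h1.trans g1)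
    · exact Or.inr (h1.trans (congrArg _ (S4 k hk).1))
  have hbits : pvBit (pvParF st.uid st.ux n i) := pvParF_bit hb hInv.2.2.2.1 n i hi
  have hbitsj : pvBit (pvParF st.uid st.ux n j) := pvParF_bit hb hInv.2.2.2.1 n j hj
  rw [ufUnion_eq]
  by_cases hcase : F1.2 = F2.2
  · -- same root
    have hrr : pvRootF st.uid n i = pvRootF st.uid n j := by
      rw [hret1, hret2] at hcase
      exact_mod_cast hcase
    simp only [← hF1, ← hF2, if_pos hcase]
    refine ⟨T2, fun _ => ⟨?_, hC3⟩, fun hne => absurd hrr hne⟩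
    simp only [PySem.List.pyGetD_natCast, hxi, hxj, beq_iff_eq]
    exact pvBxor_eq_one_iff hbits hbitsj
  · -- different roots
    have hrr : pvRootF st.uid n i ≠ pvRootF st.uid n j := by
      intro hcontra
      exact hcase (by rw [hret1, hret2, hcontra])
    simp only [← hF1, ← hF2, if_neg hcase]
    obtain ⟨di, hdi⟩ := Option.isSome_iff_exists.mp (hInv.2.2.2.2.2 i hi)
    obtain ⟨dj, hdj⟩ := Option.isSome_iff_exists.mp (hInv.2.2.2.2.2 j hj)
    obtain ⟨hri1, hri2, _⟩ := pvRootF_isRoot hb di i hi hdi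
    obtain ⟨hrj1, hrj2, _⟩ := pvRootF_isRoot hb dj j hj hdj
    have hvi : F2.1.uid.getD (pvRootF st.uid n i) 0 = ((pvRootF st.uid n i : Nat) : Int) :=
      pvRootStays hInv hri1 hri2 (hC4' _ hri2)
    have hvj : F2.1.uid.getD (pvRootF st.uid n j) 0 = ((pvRootF st.uid n j : Nat) : Int) :=
      pvRootStays hInv hrj1 hrj2 (hC4' _ hrj2)
    have hfixi : pvParent F2.1.uid (pvRootF st.uid n i) = pvRootF st.uid n i := by
      unfold pvParent; rw [hvi]; simp
    have hfixj : pvParent F2.1.uid (pvRootF st.uid n j) = pvRootF st.uid n j := by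
      unfold pvParent; rw [hvj]; simp
    have hδbit : pvBit (PySem.Int.bxor (PySem.Int.bxor (pvParF st.uid st.ux n i)
        (pvParF st.uid st.ux n j)) 1) :=
      pvBit_bxor (pvBit_bxor hbits hbitsj) (Or.inr rfl)
    by_cases hcnt : PySem.List.pyGetD F2.1.cnt F1.2 0 > PySem.List.pyGetD F2.1.cnt F2.2 0
    · -- swapped: merge root(j) under root(i)
      simp only [if_pos hcnt]
      simp only [hret1, hret2, PySem.List.pySetD_natCast, PySem.List.pyGetD_natCast]
      rw [hxj, hxi]
      have hvalδ : PySem.Int.bxor (PySem.Int.bxor (pvParF st.uid st.ux n j)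
          (pvParF st.uid st.ux n i)) 1
          = PySem.Int.bxor (PySem.Int.bxor (pvParF st.uid st.ux n i)
              (pvParF st.uid st.ux n j)) 1 := by
        rw [pvBxor_comm hbitsj hbits]
      rw [hvalδ]
      obtain ⟨hInv', hform⟩ := pvLinkState F2.1 T2 (pvRootF st.uid n j) (pvRootF st.uid n i)
        hrj2 hri2 hfixj hfixi (Ne.symm hrr) _ hδbit
        (PySem.List.pySetD F2.1.cnt (pvRootF st.uid n i : Int)
          (PySem.List.pyGetD F2.1.cnt (pvRootF st.uid n i : Int) 0 +
           PySem.List.pyGetD F2.1.cnt (pvRootF st.uid n j : Int) 0))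
      refine ⟨hInv', fun heq => absurd heq hrr, fun _ => ⟨by trivial, pvRootF st.uid n j, pvRootF st.uid n i,
        Or.inr ⟨rfl, rfl⟩, ?_⟩⟩
      intro k hk
      obtain ⟨hfr, hfp⟩ := hform k hk
      rw [(hC3 k hk).1] at hfr
      rw [(hC3 k hk).1, (hC3 k hk).2] at hfp
      exact ⟨hfr, hfp⟩
    · -- unswapped: merge root(i) under root(j)
      simp only [if_neg hcnt]
      simp only [hret1, hret2, PySem.List.pySetD_natCast, PySem.List.pyGetD_natCast]
      rw [hxj, hxi]
      obtain ⟨hInv', hform⟩ := pvLinkState F2.1 T2 (pvRootF st.uid n i) (pvRootF st.uid n j)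
        hri2 hrj2 hfixi hfixj hrr _ hδbit
        (PySem.List.pySetD F2.1.cnt (pvRootF st.uid n j : Int)
          (PySem.List.pyGetD F2.1.cnt (pvRootF st.uid n j : Int) 0 +
           PySem.List.pyGetD F2.1.cnt (pvRootF st.uid n i : Int) 0))
      refine ⟨hInv', fun heq => absurd heq hrr, fun _ => ⟨by trivial, pvRootF st.uid n i, pvRootF st.uid n j,
        Or.inl ⟨rfl, rfl⟩, ?_⟩⟩
      intro k hk
      obtain ⟨hfr, hfp⟩ := hform k hk
      rw [(hC3 k hk).1] at hfr
      rw [(hC3 k hk).1, (hC3 k hk).2] at hfp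
      exact ⟨hfr, hfp⟩

-- B-side: semantics of the relabel loop in bScan
lemma pvRelabel {nn : Nat} {comp color : List Int} (hc : comp.length = nn)
    (hl : color.length = nn) (ci cj flip : Int) :
    ((PySem.List.pyRange 0 (nn : Int) 1).foldl (fun (s : List Int × List Int) k =>
        if PySem.List.pyGetD s.1 k 0 = ci then
          (PySem.List.pySetD s.1 k cj,
           PySem.List.pySetD s.2 k (PySem.Int.bxor (PySem.List.pyGetD s.2 k 0) flip))
        else s) (comp, color))
      = (comp.map (fun c => if c = ci then cj else c),
         List.zipWith (fun c col => if c = ci then PySem.Int.bxor col flip else col) comp color) := by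
  suffices h : ∀ m, m ≤ nn →
      ((PySem.List.pyRange 0 (m : Int) 1).foldl (fun (s : List Int × List Int) k =>
        if PySem.List.pyGetD s.1 k 0 = ci then
          (PySem.List.pySetD s.1 k cj,
           PySem.List.pySetD s.2 k (PySem.Int.bxor (PySem.List.pyGetD s.2 k 0) flip))
        else s) (comp, color))
      = ((comp.take m).map (fun c => if c = ci then cj else c) ++ comp.drop m,
         List.zipWith (fun c col => if c = ci then PySem.Int.bxor col flip else col)
           (comp.take m) (color.take m) ++ color.drop m) by
    have := h nn le_rfl
    rw [this]
    congr 1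
    · rw [List.take_of_length_le (by omega), List.drop_of_length_le (by omega)]
      simp
    · rw [List.take_of_length_le (by omega), List.take_of_length_le (by omega),
        List.drop_of_length_le (by omega)]
      simp
  intro m
  induction m with
  | zero => simp [PySem.List.pyRange_zero_nat]
  | succ m ihm =>
    intro hm
    have hm' : m ≤ nn := by omega
    have hstep := ihm hm'
    have hcast : ((m+1 : Nat) : Int) = (m : Int) + 1 := by push_cast; ring
    rw [hcast, PySem.List.pyRange_one_succ_right (by positivity), List.foldl_append, hstep]
    simp only [List.foldl_cons, List.foldl_nil]
    have hmc : m < comp.length := by omega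
    have hml : m < color.length := by omega
    have hlen1 : ((comp.take m).map (fun c => if c = ci then cj else c)).length = m := by
      simp [List.length_take]; omega
    have hlen2 : (List.zipWith (fun c col => if c = ci then PySem.Int.bxor col flip else col)
        (comp.take m) (color.take m)).length = m := by
      simp [List.length_take]; omega
    have hget1 : (((comp.take m).map (fun c => if c = ci then cj else c) ++ comp.drop m).getD m 0)
        = comp[m] := by
      rw [List.getD, List.getElem?_append_right (by omega), hlen1]
      simp [List.getElem?_drop, List.getElem?_eq_getElem hmc]
    have hget2 : ((List.zipWith (fun c col => if c = ci then PySem.Int.bxor col flip else col)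
        (comp.take m) (color.take m) ++ color.drop m).getD m 0) = color[m] := by
      rw [List.getD, List.getElem?_append_right (by omega), hlen2]
      simp [List.getElem?_drop, List.getElem?_eq_getElem hml]
    have hdropc : comp.drop m = comp[m] :: comp.drop (m+1) := List.drop_eq_getElem_cons hmc
    have hdropl : color.drop m = color[m] :: color.drop (m+1) := List.drop_eq_getElem_cons hml
    have htakec : comp.take (m+1) = comp.take m ++ [comp[m]] := by
      rw [List.take_succ, List.getElem?_eq_getElem hmc]; rfl
    have htakel : color.take (m+1) = color.take m ++ [color[m]] := by
      rw [List.take_succ, List.getElem?_eq_getElem hml]; rfl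
    have hset1 : (((comp.take m).map (fun c => if c = ci then cj else c) ++ comp.drop m).set m cj)
        = ((comp.take m).map (fun c => if c = ci then cj else c) ++ (cj :: comp.drop (m+1))) := by
      rw [List.set_append, if_neg (by omega), hlen1, Nat.sub_self, hdropc]
      rfl
    have hset2 : ((List.zipWith (fun c col => if c = ci then PySem.Int.bxor col flip else col)
          (comp.take m) (color.take m) ++ color.drop m).set m
            (PySem.Int.bxor color[m] flip))
        = (List.zipWith (fun c col => if c = ci then PySem.Int.bxor col flip else col)
            (comp.take m) (color.take m) ++ (PySem.Int.bxor color[m] flip :: color.drop (m+1))) := by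
      rw [List.set_append, if_neg (by omega), hlen2, Nat.sub_self, hdropl]
      rfl
    have hzipnew : List.zipWith (fun c col => if c = ci then PySem.Int.bxor col flip else col)
        (comp.take (m+1)) (color.take (m+1))
        = List.zipWith (fun c col => if c = ci then PySem.Int.bxor col flip else col)
            (comp.take m) (color.take m)
          ++ [if comp[m] = ci then PySem.Int.bxor color[m] flip else color[m]] := by
      rw [htakec, htakel, List.zipWith_append (by simp [List.length_take]; omega)]
      rfl
    have hmapnew : (comp.take (m+1)).map (fun c => if c = ci then cj else c)
        = (comp.take m).map (fun c => if c = ci then cj else c)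
          ++ [if comp[m] = ci then cj else comp[m]] := by
      rw [htakec, List.map_append]; rfl
    by_cases hcm : comp[m] = ci
    · rw [if_pos (by simp only [PySem.List.pyGetD_natCast]; rw [hget1]; exact hcm)]
      simp only [PySem.List.pySetD_natCast, PySem.List.pyGetD_natCast]
      rw [hget2, hset1, hset2, hmapnew, hzipnew, if_pos hcm, if_pos hcm]
      simp
    · rw [if_neg (by simp only [PySem.List.pyGetD_natCast]; rw [hget1]; exact hcm)]
      rw [hmapnew, hzipnew, if_neg hcm, if_neg hcm, hdropc, hdropl]
      simp

-- A-side flat edge runner (proof-layer view of A's two nested loops)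
def runFlat (st : UF) : List (Int × Int × Int) → Int
  | [] => 0
  | e :: rest =>
    let r := ufUnion st e.2.1 e.2.2 1
    if r.2 then runFlat r.1 rest else e.1

def pvRel (st : UF) (comp color : List Int) (n : Nat) : Prop :=
  pvInv st n ∧ comp.length = n ∧ color.length = n ∧
  (∀ k, k < n → pvBit (color.getD k 0)) ∧
  (∀ k l, k < n → l < n →
    (pvRootF st.uid n k = pvRootF st.uid n l ↔ comp.getD k 0 = comp.getD l 0)) ∧
  (∀ k l, k < n → l < n → pvRootF st.uid n k = pvRootF st.uid n l →
    PySem.Int.bxor (pvParF st.uid st.ux n k) (pvParF st.uid st.ux n l)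
      = PySem.Int.bxor (color.getD k 0) (color.getD l 0))

lemma pvMergeNat (u v rs rb : Nat) (hne : rs ≠ rb) :
    ((if u = rs then rb else u) = (if v = rs then rb else v)
      ↔ (u = v ∨ ((u = rs ∨ u = rb) ∧ (v = rs ∨ v = rb)))) := by
  split_ifs <;> omega

lemma pvMergeInt (u v ci cj : Int) (hne : ci ≠ cj) :
    ((if u = ci then cj else u) = (if v = ci then cj else v)
      ↔ (u = v ∨ ((u = ci ∨ u = cj) ∧ (v = ci ∨ v = cj)))) := by
  split_ifs <;> omega

lemma pvBxor_cancel {p q x : Int} (hp : pvBit p) (hq : pvBit q) (hx : pvBit x) :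
    PySem.Int.bxor (PySem.Int.bxor p x) (PySem.Int.bxor q x) = PySem.Int.bxor p q := by
  rcases hp with rfl|rfl <;> rcases hq with rfl|rfl <;> rcases hx with rfl|rfl <;> decide

lemma pvBitsS1T1 {pk pl pa pb ck cl ca cb : Int}
    (bk : pvBit pk) (bl : pvBit pl) (ba : pvBit pa) (bb : pvBit pb)
    (ek : pvBit ck) (el : pvBit cl) (ea : pvBit ca) (eb : pvBit cb)
    (h1 : PySem.Int.bxor pk pa = PySem.Int.bxor ck ca)
    (h2 : PySem.Int.bxor pl pb = PySem.Int.bxor cl cb) :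
    PySem.Int.bxor (PySem.Int.bxor pk (PySem.Int.bxor (PySem.Int.bxor pa pb) 1)) pl
      = PySem.Int.bxor (PySem.Int.bxor ck (PySem.Int.bxor (PySem.Int.bxor ca cb) 1)) cl := by
  revert h1 h2
  rcases bk with rfl|rfl <;> rcases bl with rfl|rfl <;> rcases ba with rfl|rfl <;>
    rcases bb with rfl|rfl <;> rcases ek with rfl|rfl <;> rcases el with rfl|rfl <;>
    rcases ea with rfl|rfl <;> rcases eb with rfl|rfl <;> decide

lemma pvBitsS2T1 {pk pl pa pb ck cl ca cb : Int}
    (bk : pvBit pk) (bl : pvBit pl) (ba : pvBit pa) (bb : pvBit pb)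
    (ek : pvBit ck) (el : pvBit cl) (ea : pvBit ca) (eb : pvBit cb)
    (h1 : PySem.Int.bxor pk pa = PySem.Int.bxor ck ca)
    (h2 : PySem.Int.bxor pl pb = PySem.Int.bxor cl cb) :
    PySem.Int.bxor pk (PySem.Int.bxor pl (PySem.Int.bxor (PySem.Int.bxor pa pb) 1))
      = PySem.Int.bxor (PySem.Int.bxor ck (PySem.Int.bxor (PySem.Int.bxor ca cb) 1)) cl := by
  revert h1 h2
  rcases bk with rfl|rfl <;> rcases bl with rfl|rfl <;> rcases ba with rfl|rfl <;>
    rcases bb with rfl|rfl <;> rcases ek with rfl|rfl <;> rcases el with rfl|rfl <;>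
    rcases ea with rfl|rfl <;> rcases eb with rfl|rfl <;> decide

lemma pvBitsS1T2 {pk pl pa pb ck cl ca cb : Int}
    (bk : pvBit pk) (bl : pvBit pl) (ba : pvBit pa) (bb : pvBit pb)
    (ek : pvBit ck) (el : pvBit cl) (ea : pvBit ca) (eb : pvBit cb)
    (h1 : PySem.Int.bxor pk pa = PySem.Int.bxor ck ca)
    (h2 : PySem.Int.bxor pl pb = PySem.Int.bxor cl cb) :
    PySem.Int.bxor (PySem.Int.bxor pk (PySem.Int.bxor (PySem.Int.bxor pa pb) 1)) pl
      = PySem.Int.bxor ck (PySem.Int.bxor cl (PySem.Int.bxor (PySem.Int.bxor ca cb) 1)) := by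
  revert h1 h2
  rcases bk with rfl|rfl <;> rcases bl with rfl|rfl <;> rcases ba with rfl|rfl <;>
    rcases bb with rfl|rfl <;> rcases ek with rfl|rfl <;> rcases el with rfl|rfl <;>
    rcases ea with rfl|rfl <;> rcases eb with rfl|rfl <;> decide

lemma pvBitsS2T2 {pk pl pa pb ck cl ca cb : Int}
    (bk : pvBit pk) (bl : pvBit pl) (ba : pvBit pa) (bb : pvBit pb)
    (ek : pvBit ck) (el : pvBit cl) (ea : pvBit ca) (eb : pvBit cb)
    (h1 : PySem.Int.bxor pk pa = PySem.Int.bxor ck ca)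
    (h2 : PySem.Int.bxor pl pb = PySem.Int.bxor cl cb) :
    PySem.Int.bxor pk (PySem.Int.bxor pl (PySem.Int.bxor (PySem.Int.bxor pa pb) 1))
      = PySem.Int.bxor ck (PySem.Int.bxor cl (PySem.Int.bxor (PySem.Int.bxor ca cb) 1)) := by
  revert h1 h2
  rcases bk with rfl|rfl <;> rcases bl with rfl|rfl <;> rcases ba with rfl|rfl <;>
    rcases bb with rfl|rfl <;> rcases ek with rfl|rfl <;> rcases el with rfl|rfl <;>
    rcases ea with rfl|rfl <;> rcases eb with rfl|rfl <;> decide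

lemma pvGetD_map_f {l : List Int} {k : Nat} (hk : k < l.length) (f : Int → Int) :
    (l.map f).getD k 0 = f (l.getD k 0) := by
  simp [List.getD, List.getElem?_eq_getElem, hk]

lemma pvGetD_zip {A B : List Int} {k : Nat} (hA : k < A.length) (hB : k < B.length)
    (g : Int → Int → Int) : (List.zipWith g A B).getD k 0 = g (A.getD k 0) (B.getD k 0) := by
  simp [List.getD, List.getElem?_zipWith, List.getElem?_eq_getElem, hA, hB]

set_option maxHeartbeats 1000000 in
lemma pvRelStep {n : Nat} (st : UF) (comp color : List Int) (hRel : pvRel st comp color n)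
    (a b : Nat) (ha : a < n) (hb : b < n) :
    ((comp.getD a 0 = comp.getD b 0 ∧ color.getD a 0 = color.getD b 0) →
       (ufUnion st (a:Int) (b:Int) 1).2 = false) ∧
    ((comp.getD a 0 = comp.getD b 0 ∧ color.getD a 0 ≠ color.getD b 0) →
       (ufUnion st (a:Int) (b:Int) 1).2 = true ∧ pvRel (ufUnion st (a:Int) (b:Int) 1).1 comp color n) ∧
    (comp.getD a 0 ≠ comp.getD b 0 →
       (ufUnion st (a:Int) (b:Int) 1).2 = true ∧
       pvRel (ufUnion st (a:Int) (b:Int) 1).1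
         (comp.map (fun c => if c = comp.getD a 0 then comp.getD b 0 else c))
         (List.zipWith (fun c col => if c = comp.getD a 0
             then PySem.Int.bxor col (PySem.Int.bxor (PySem.Int.bxor (color.getD a 0)
               (color.getD b 0)) 1) else col) comp color) n) := by
  obtain ⟨hInv, hcl, hll, hcolbit, hiff, hpar⟩ := hRel
  have hbnds := pvInv_hb hInv
  have hparbit : ∀ k, k < n → pvBit (pvParF st.uid st.ux n k) :=
    fun k hk => pvParF_bit hbnds hInv.2.2.2.1 n k hk
  obtain ⟨UInv, Hsame, Hdiff⟩ := ufUnion_spec st hInv a b ha hb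
  refine ⟨?_, ?_, ?_⟩
  · rintro ⟨hcc, hcol⟩
    have hroots : pvRootF st.uid n a = pvRootF st.uid n b := (hiff a b ha hb).mpr hcc
    have hpp : PySem.Int.bxor (pvParF st.uid st.ux n a) (pvParF st.uid st.ux n b)
        = PySem.Int.bxor (color.getD a 0) (color.getD b 0) := hpar a b ha hb hroots
    have hzero : PySem.Int.bxor (color.getD a 0) (color.getD b 0) = 0 :=
      (pvBxor_eq_zero_iff (hcolbit a ha) (hcolbit b hb)).mpr hcol
    have hpeq : pvParF st.uid st.ux n a = pvParF st.uid st.ux n b :=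
      (pvBxor_eq_zero_iff (hparbit a ha) (hparbit b hb)).mp (hpp.trans hzero)
    have hiff2 := (Hsame hroots).1
    cases hU : (ufUnion st (a:Int) (b:Int) 1).2
    · rfl
    · exact absurd (hiff2.mp hU) (by simpa using hpeq)
  · rintro ⟨hcc, hcol⟩
    have hroots : pvRootF st.uid n a = pvRootF st.uid n b := (hiff a b ha hb).mpr hcc
    have hpp := hpar a b ha hb hroots
    have hpne : pvParF st.uid st.ux n a ≠ pvParF st.uid st.ux n b := by
      intro heq
      have h0 : PySem.Int.bxor (pvParF st.uid st.ux n a) (pvParF st.uid st.ux n b) = 0 :=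
        (pvBxor_eq_zero_iff (hparbit a ha) (hparbit b hb)).mpr heq
      exact hcol ((pvBxor_eq_zero_iff (hcolbit a ha) (hcolbit b hb)).mp (hpp.symm.trans h0))
    obtain ⟨hiff2, hpres⟩ := Hsame hroots
    refine ⟨hiff2.mpr hpne, UInv, hcl, hll, hcolbit, ?_, ?_⟩
    · intro k l hk hl
      rw [(hpres k hk).1, (hpres l hl).1]
      exact hiff k l hk hl
    · intro k l hk hl hr
      rw [(hpres k hk).1, (hpres l hl).1] at hr
      rw [(hpres k hk).2, (hpres l hl).2]
      exact hpar k l hk hl hr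
  · intro hcc
    have hroots : pvRootF st.uid n a ≠ pvRootF st.uid n b := by
      intro heq; exact hcc ((hiff a b ha hb).mp heq)
    obtain ⟨hU, rs, rb', hAB, hform⟩ := Hdiff hroots
    have hrsrb : rs ≠ rb' := by rcases hAB with ⟨h1, h2⟩ | ⟨h1, h2⟩ <;> omega
    set ci := comp.getD a 0 with hci
    set cj := comp.getD b 0 with hcj
    set flip := PySem.Int.bxor (PySem.Int.bxor (color.getD a 0) (color.getD b 0)) 1 with hflip
    have hflipbit : pvBit flip := pvBit_bxor (pvBit_bxor (hcolbit a ha) (hcolbit b hb)) (Or.inr rfl)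
    have hcomp' : ∀ k, k < n →
        (comp.map (fun c => if c = ci then cj else c)).getD k 0
          = (if comp.getD k 0 = ci then cj else comp.getD k 0) :=
      fun k hk => pvGetD_map_f (by omega) _
    have hcolor' : ∀ k, k < n →
        (List.zipWith (fun c col => if c = ci then PySem.Int.bxor col flip else col) comp color).getD k 0
          = (if comp.getD k 0 = ci then PySem.Int.bxor (color.getD k 0) flip else color.getD k 0) :=
      fun k hk => pvGetD_zip (by omega) (by omega) _
    have hmemk : ∀ k, k < n →
        ((pvRootF st.uid n k = rs ∨ pvRootF st.uid n k = rb')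
          ↔ (comp.getD k 0 = ci ∨ comp.getD k 0 = cj)) := by
      intro k hk
      have e1 : pvRootF st.uid n k = pvRootF st.uid n a ↔ comp.getD k 0 = ci := hiff k a hk ha
      have e2 : pvRootF st.uid n k = pvRootF st.uid n b ↔ comp.getD k 0 = cj := hiff k b hk hb
      rcases hAB with ⟨h1, h2⟩ | ⟨h1, h2⟩
      · rw [h1, h2]
        constructor
        · rintro (h | h)
          exacts [Or.inl (e1.mp h), Or.inr (e2.mp h)]
        · rintro (h | h)
          exacts [Or.inl (e1.mpr h), Or.inr (e2.mpr h)]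
      · rw [h1, h2]
        constructor
        · rintro (h | h)
          exacts [Or.inr (e2.mp h), Or.inl (e1.mp h)]
        · rintro (h | h)
          exacts [Or.inr (e1.mpr h), Or.inl (e2.mpr h)]
    refine ⟨hU, UInv, by simpa using hcl, by simp [hcl, hll], ?_, ?_, ?_⟩
    · intro k hk
      rw [hcolor' k hk]
      split
      · exact pvBit_bxor (hcolbit k hk) hflipbit
      · exact hcolbit k hk
    · intro k l hk hl
      rw [(hform k hk).1, (hform l hl).1, hcomp' k hk, hcomp' l hl,
        pvMergeNat _ _ _ _ hrsrb, pvMergeInt _ _ _ _ hcc]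
      constructor
      · rintro (h | ⟨h1, h2⟩)
        · exact Or.inl ((hiff k l hk hl).mp h)
        · exact Or.inr ⟨(hmemk k hk).mp h1, (hmemk l hl).mp h2⟩
      · rintro (h | ⟨h1, h2⟩)
        · exact Or.inl ((hiff k l hk hl).mpr h)
        · exact Or.inr ⟨(hmemk k hk).mpr h1, (hmemk l hl).mpr h2⟩
    · intro k l hk hl hr
      rw [(hform k hk).1, (hform l hl).1] at hr
      rw [(hform k hk).2, (hform l hl).2, hcolor' k hk, hcolor' l hl]
      have hrab : pvRootF st.uid n a ≠ pvRootF st.uid n b := hroots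
      by_cases hkl : pvRootF st.uid n k = pvRootF st.uid n l
      · have hccl : comp.getD k 0 = comp.getD l 0 := (hiff k l hk hl).mp hkl
        have hbase := hpar k l hk hl hkl
        by_cases hs : pvRootF st.uid n k = rs <;> by_cases ht : comp.getD k 0 = ci
        · rw [if_pos hs, if_pos (hkl ▸ hs), if_pos ht, if_pos (hccl ▸ ht),
            pvBxor_cancel (hparbit k hk) (hparbit l hl)
              (pvBit_bxor (pvBit_bxor (hparbit a ha) (hparbit b hb)) (Or.inr rfl)),
            pvBxor_cancel (hcolbit k hk) (hcolbit l hl) hflipbit]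
          exact hbase
        · rw [if_pos hs, if_pos (hkl ▸ hs), if_neg ht, if_neg (hccl ▸ ht),
            pvBxor_cancel (hparbit k hk) (hparbit l hl)
              (pvBit_bxor (pvBit_bxor (hparbit a ha) (hparbit b hb)) (Or.inr rfl))]
          exact hbase
        · rw [if_neg hs, if_neg (hkl ▸ hs), if_pos ht, if_pos (hccl ▸ ht),
            pvBxor_cancel (hcolbit k hk) (hcolbit l hl) hflipbit]
          exact hbase
        · rw [if_neg hs, if_neg (hkl ▸ hs), if_neg ht, if_neg (hccl ▸ ht)]
          exact hbase
      · -- different old classes, merged now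
        have hmm := (pvMergeNat (pvRootF st.uid n k) (pvRootF st.uid n l) rs rb' hrsrb).mp hr
        rcases hmm with h | ⟨hk1, hl1⟩
        · exact absurd h hkl
        have hclassify : (pvRootF st.uid n k = pvRootF st.uid n a ∧
              pvRootF st.uid n l = pvRootF st.uid n b) ∨
            (pvRootF st.uid n k = pvRootF st.uid n b ∧
              pvRootF st.uid n l = pvRootF st.uid n a) := by
          rcases hAB with ⟨h1, h2⟩ | ⟨h1, h2⟩ <;> rcases hk1 with hk2 | hk2 <;>
            rcases hl1 with hl2 | hl2 <;> first
            | (exfalso; apply hkl; omega)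
            | (left; omega)
            | (right; omega)
        rcases hclassify with ⟨hka, hlb⟩ | ⟨hkb, hla⟩
        · -- k ~ a, l ~ b
          have ht1 : comp.getD k 0 = ci := (hiff k a hk ha).mp hka
          have ht2 : comp.getD l 0 ≠ ci := fun hcon =>
            hrab (((hiff l a hl ha).mpr hcon).symm.trans hlb)
          have h1 := hpar k a hk ha hka
          have h2 := hpar l b hl hb hlb
          rw [if_pos ht1, if_neg ht2]
          rcases hAB with ⟨hrs, hrb⟩ | ⟨hrs, hrb⟩
          · rw [if_pos (show pvRootF st.uid n k = rs by omega),
              if_neg (show ¬ pvRootF st.uid n l = rs by omega)]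
            exact pvBitsS1T1 (hparbit k hk) (hparbit l hl) (hparbit a ha) (hparbit b hb)
              (hcolbit k hk) (hcolbit l hl) (hcolbit a ha) (hcolbit b hb) h1 h2
          · rw [if_neg (show ¬ pvRootF st.uid n k = rs by omega),
              if_pos (show pvRootF st.uid n l = rs by omega)]
            exact pvBitsS2T1 (hparbit k hk) (hparbit l hl) (hparbit a ha) (hparbit b hb)
              (hcolbit k hk) (hcolbit l hl) (hcolbit a ha) (hcolbit b hb) h1 h2
        · -- k ~ b, l ~ a
          have ht1 : comp.getD k 0 ≠ ci := fun hcon =>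
            hrab (((hiff k a hk ha).mpr hcon).symm.trans hkb)
          have ht2 : comp.getD l 0 = ci := (hiff l a hl ha).mp hla
          have h1 := hpar k b hk hb hkb
          have h2 := hpar l a hl ha hla
          rw [if_neg ht1, if_pos ht2, hflip,
            pvBxor_comm (hcolbit a ha) (hcolbit b hb),
            pvBxor_comm (hparbit a ha) (hparbit b hb)]
          rcases hAB with ⟨hrs, hrb⟩ | ⟨hrs, hrb⟩
          · rw [if_neg (show ¬ pvRootF st.uid n k = rs by omega),
              if_pos (show pvRootF st.uid n l = rs by omega)]
            exact pvBitsS2T2 (hparbit k hk) (hparbit l hl) (hparbit b hb) (hparbit a ha)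
              (hcolbit k hk) (hcolbit l hl) (hcolbit b hb) (hcolbit a ha) h1 h2
          · rw [if_pos (show pvRootF st.uid n k = rs by omega),
              if_neg (show ¬ pvRootF st.uid n l = rs by omega)]
            exact pvBitsS1T2 (hparbit k hk) (hparbit l hl) (hparbit b hb) (hparbit a ha)
              (hcolbit k hk) (hcolbit l hl) (hcolbit b hb) (hcolbit a ha) h1 h2

lemma runFlat_cons (st : UF) (e : Int × Int × Int) (rest : List (Int × Int × Int)) :
    runFlat st (e :: rest)
      = (if (ufUnion st e.2.1 e.2.2 1).2 then runFlat (ufUnion st e.2.1 e.2.2 1).1 rest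
         else e.1) := rfl

lemma bScan_cons (n : Int) (comp color : List Int) (e : Int × Int × Int)
    (rest : List (Int × Int × Int)) :
    bScan n comp color (e :: rest)
      = (if PySem.List.pyGetD comp e.2.1 0 = PySem.List.pyGetD comp e.2.2 0 then
           (if PySem.List.pyGetD color e.2.1 0 = PySem.List.pyGetD color e.2.2 0 then e.1
            else bScan n comp color rest)
         else
           bScan n
             ((PySem.List.pyRange 0 n 1).foldl (fun (s : List Int × List Int) k =>
               if PySem.List.pyGetD s.1 k 0 = PySem.List.pyGetD comp e.2.1 0 then
                 (PySem.List.pySetD s.1 k (PySem.List.pyGetD comp e.2.2 0),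
                  PySem.List.pySetD s.2 k (PySem.Int.bxor (PySem.List.pyGetD s.2 k 0)
                    (PySem.Int.bxor (PySem.Int.bxor (PySem.List.pyGetD color e.2.1 0)
                      (PySem.List.pyGetD color e.2.2 0)) 1)))
               else s) (comp, color)).1
             ((PySem.List.pyRange 0 n 1).foldl (fun (s : List Int × List Int) k =>
               if PySem.List.pyGetD s.1 k 0 = PySem.List.pyGetD comp e.2.1 0 then
                 (PySem.List.pySetD s.1 k (PySem.List.pyGetD comp e.2.2 0),
                  PySem.List.pySetD s.2 k (PySem.Int.bxor (PySem.List.pyGetD s.2 k 0)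
                    (PySem.Int.bxor (PySem.Int.bxor (PySem.List.pyGetD color e.2.1 0)
                      (PySem.List.pyGetD color e.2.2 0)) 1)))
               else s) (comp, color)).2 rest) := rfl

set_option maxHeartbeats 1000000 in
lemma pvRun_eq {n : Nat} : ∀ (edges : List (Int × Int × Int)) (st : UF) (comp color : List Int),
    pvRel st comp color n →
    (∀ e ∈ edges, ∃ a b : Nat, a < n ∧ b < n ∧ e.2.1 = (a : Int) ∧ e.2.2 = (b : Int)) →
    runFlat st edges = bScan (n : Int) comp color edges := by
  intro edges
  induction edges with
  | nil => intro st comp color _ _; rfl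
  | cons e rest ih =>
    intro st comp color hRel hbound
    obtain ⟨a, b, ha, hb, he1, he2⟩ := hbound e (by simp)
    have hbr : ∀ e' ∈ rest, ∃ a b : Nat, a < n ∧ b < n ∧ e'.2.1 = (a : Int) ∧ e'.2.2 = (b : Int) :=
      fun e' he' => hbound e' (by simp [he'])
    obtain ⟨hstep1, hstep2, hstep3⟩ := pvRelStep st comp color hRel a b ha hb
    obtain ⟨hInv, hcl, hll, _, _, _⟩ := hRel
    rw [runFlat_cons, bScan_cons, he1, he2]
    simp only [PySem.List.pyGetD_natCast]
    by_cases hcc : comp.getD a 0 = comp.getD b 0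
    · rw [if_pos hcc]
      by_cases hcol : color.getD a 0 = color.getD b 0
      · rw [if_pos hcol, hstep1 ⟨hcc, hcol⟩]
        simp
      · rw [if_neg hcol]
        obtain ⟨hU, hRel'⟩ := hstep2 ⟨hcc, hcol⟩
        rw [hU]
        simp only [if_true]
        exact ih _ comp color hRel' hbr
    · rw [if_neg hcc]
      obtain ⟨hU, hRel'⟩ := hstep3 hcc
      rw [hU]
      simp only [if_true]
      rw [pvRelabel hcl hll]
      exact ih _ _ _ hRel' hbr

-- insertion-sort stability helpers
lemma pvInsertBy_skip {α : Type} (before : α → α → Bool) (x : α) :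
    ∀ (A B : List α), (∀ e ∈ A, before x e = false) →
      PySem.List.insertBy before x (A ++ B) = A ++ PySem.List.insertBy before x B := by
  intro A
  induction A with
  | nil => intro B _; rfl
  | cons y ys ihy =>
    intro B h
    rw [List.cons_append, PySem.List.insertBy, if_neg (by simp [h y (by simp)]),
      ihy B (fun e he => h e (by simp [he])), List.cons_append]

lemma pvInsertBy_front {α : Type} (before : α → α → Bool) (x : α) :
    ∀ (L : List α), (∀ e ∈ L, before x e = true) →
      PySem.List.insertBy before x L = x :: L := by
  intro L h
  cases L with
  | nil => rfl
  | cons y ys => rw [PySem.List.insertBy, if_pos (h y (by simp))]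

lemma pvInsertBy_perm {α : Type} (before : α → α → Bool) (x : α) :
    ∀ (L : List α), (PySem.List.insertBy before x L).Perm (x :: L) := by
  intro L
  induction L with
  | nil => exact List.Perm.refl _
  | cons y ys ihy =>
    rw [PySem.List.insertBy]
    split
    · exact List.Perm.refl _
    · exact (List.Perm.cons y ihy).trans (List.Perm.swap x y ys)

lemma pvPairwise_insertBy {v : Int} : ∀ {L : List Int}, L.Pairwise (· < ·) → v ∉ L →
    (PySem.List.insertBy (fun a b => decide (a < b)) v L).Pairwise (· < ·) := by
  intro L
  induction L with
  | nil => intro _ _; simp [PySem.List.insertBy]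
  | cons y ys ihy =>
    intro hp hv
    rw [PySem.List.insertBy]
    rcases List.pairwise_cons.mp hp with ⟨hy, hys⟩
    by_cases hlt : v < y
    · rw [if_pos (by simpa using hlt)]
      exact List.pairwise_cons.mpr ⟨by
        intro z hz
        rcases List.mem_cons.mp hz with rfl | hz'
        · exact hlt
        · exact hlt.trans (hy z hz'), hp⟩
    · rw [if_neg (by simpa using hlt)]
      have hvy : y < v := by
        rcases lt_or_eq_of_le (le_of_not_gt hlt) with h | h
        · exact h
        · exact absurd h.symm (fun hh => hv (by simp [hh]))
      refine List.pairwise_cons.mpr ⟨?_, ihy hys (fun hc => hv (by simp [hc]))⟩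
      intro z hz
      rcases (PySem.List.mem_insertBy _ _ _ _).mp hz with rfl | hz'
      · exact hvy
      · exact hy z hz'

lemma pvFlatMap_congr {α β : Type} {l : List α} {f g : α → List β}
    (h : ∀ a ∈ l, f a = g a) : l.flatMap f = l.flatMap g := by
  induction l with
  | nil => rfl
  | cons y ys ihy =>
    rw [List.flatMap_cons, List.flatMap_cons, h y (by simp), ihy (fun a ha => h a (by simp [ha]))]

lemma pvKey_of_mem_filter {α : Type} {key : α → Int} {l : List α} {d : Int} {e : α}
    (h : e ∈ l.filter (fun e => key e == d)) : key e = d := by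
  have := List.of_mem_filter h
  simpa using this

set_option maxHeartbeats 1000000 in
lemma pvGroupSort {α : Type} (key : α → Int) : ∀ (l : List α),
    PySem.List.sorted l key false
      = (PySem.List.sorted (PySem.Set.ofList (l.map key)) (fun x => x) false).flatMap
          (fun dv => l.filter (fun e => key e == dv)) := by
  intro l
  induction l using List.reverseRecOn with
  | nil => rfl
  | append_singleton t x iht =>
    have hfoldl := PySem.List.sorted_eq_foldl_insertBy (t ++ [x]) key
    rw [hfoldl, List.foldl_append, ← PySem.List.sorted_eq_foldl_insertBy t key, iht]
    simp only [List.foldl_cons, List.foldl_nil]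
    set v := key x with hv
    set m := t.map key with hm
    set K := PySem.List.sorted (PySem.Set.ofList m) (fun x => x) false with hK
    have hKpw : K.Pairwise (· < ·) := PySem.List.sorted_ofList_pairwise_lt m
    have hKmem : ∀ d, d ∈ K ↔ d ∈ m := by
      intro d
      rw [hK, PySem.List.mem_sorted]
      simp [PySem.Set.mem_ofList]
    have hmap : (t ++ [x]).map key = m ++ [v] := by simp [hm, hv]
    have hofl : PySem.Set.ofList (m ++ [v])
        = if v ∈ m then PySem.Set.ofList m else PySem.Set.ofList m ++ [v] := by
      show List.foldl PySem.Set.add PySem.Set.empty (m ++ [v]) = _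
      rw [List.foldl_append]
      show PySem.Set.add (PySem.Set.ofList m) v = _
      unfold PySem.Set.add
      by_cases hvm : v ∈ m
      · rw [if_pos (by simpa [PySem.Set.mem_ofList] using hvm), if_pos hvm]
      · rw [if_neg (by simpa [PySem.Set.mem_ofList] using hvm), if_neg hvm]
    have hfilt : ∀ d : Int, (t ++ [x]).filter (fun e => key e == d)
        = t.filter (fun e => key e == d) ++ (if v = d then [x] else []) := by
      intro d
      rw [List.filter_append]
      congr 1
      by_cases hvd : v = d
      · rw [if_pos hvd]
        simp [List.filter_singleton, ← hv, hvd]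
      · rw [if_neg hvd]
        simp [List.filter_singleton, ← hv, hvd]
    by_cases hvm : v ∈ m
    · -- key already present: K unchanged, x appended to its group
      rw [hmap, hofl, if_pos hvm, ← hK]
      obtain ⟨K1, K2, hsplit⟩ := List.append_of_mem ((hKmem v).mpr hvm)
      rw [hsplit]
      have hpw := hsplit ▸ hKpw
      have hK1 : ∀ d ∈ K1, d < v := by
        intro d hd
        exact (List.pairwise_append.mp hpw).2.2 d hd v (by simp)
      have hK2 : ∀ d ∈ K2, v < d := by
        intro d hd
        exact (List.pairwise_cons.mp (List.pairwise_append.mp hpw).2.1).1 d hd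
      rw [List.flatMap_append, List.flatMap_cons, List.flatMap_append, List.flatMap_cons]
      have hskip : ∀ e ∈ K1.flatMap (fun dv => t.filter (fun e => key e == dv))
            ++ t.filter (fun e => key e == v),
          (fun a b => decide (key a < key b)) x e = false := by
        intro e he
        rcases List.mem_append.mp he with he1 | he2
        · obtain ⟨d, hd, hef⟩ := List.mem_flatMap.mp he1
          have := pvKey_of_mem_filter hef
          simp only [decide_eq_false_iff_not, not_lt, ← hv, this]
          exact le_of_lt (hK1 d hd)
        · have := pvKey_of_mem_filter he2
          simp [this, hv]
      have hfront : ∀ e ∈ K2.flatMap (fun dv => t.filter (fun e => key e == dv)),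
          (fun a b => decide (key a < key b)) x e = true := by
        intro e he
        obtain ⟨d, hd, hef⟩ := List.mem_flatMap.mp he
        have := pvKey_of_mem_filter hef
        simp only [decide_eq_true_eq, ← hv, this]
        exact hK2 d hd
      rw [← List.append_assoc,
        pvInsertBy_skip _ x _ _ hskip,
        pvInsertBy_front _ x _ hfront]
      have hgr : ∀ S : List Int, (∀ d ∈ S, d ≠ v) →
          S.flatMap (fun dv => (t ++ [x]).filter (fun e => key e == dv))
            = S.flatMap (fun dv => t.filter (fun e => key e == dv)) := by
        intro S hS
        refine pvFlatMap_congr ?_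
        intro d hd
        rw [hfilt d, if_neg (fun hc => hS d hd hc.symm), List.append_nil]
      rw [hgr K1 (fun d hd => ne_of_lt (hK1 d hd)),
        hgr K2 (fun d hd => (ne_of_lt (hK2 d hd)).symm),
        hfilt v, if_pos rfl]
      simp
    · -- new key: it is inserted into K, its group is [x]
      rw [hmap, hofl, if_neg hvm]
      have hvK : v ∉ K := fun hc => hvm ((hKmem v).mp hc)
      have hKnew : PySem.List.sorted (PySem.Set.ofList m ++ [v] : List Int) (fun x => x) false
          = PySem.List.insertBy (fun a b => decide (a < b)) v K := by
        refine PySem.List.sorted_eq_of_perm_of_pairwise_lt _ _ _ ?_ ?_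
        · refine (pvInsertBy_perm _ v K).trans ?_
          refine (List.Perm.cons v (PySem.List.sorted_perm _ _ _)).trans ?_
          exact (List.perm_append_singleton v _).symm
        · exact pvPairwise_insertBy hKpw hvK
      rw [hKnew]
      set K1 := K.takeWhile (fun d => decide (d < v)) with hK1def
      set K2 := K.dropWhile (fun d => decide (d < v)) with hK2def
      have hKsplit : K = K1 ++ K2 := (List.takeWhile_append_dropWhile).symm
      have hK1 : ∀ d ∈ K1, d < v := by
        intro d hd
        simpa using List.mem_takeWhile_imp hd
      have hK2 : ∀ d ∈ K2, v < d := by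
        intro d hd
        cases hcase : K2 with
        | nil => rw [hcase] at hd; simp at hd
        | cons h2 t2 =>
          rw [hcase] at hd
          have hh2 : ¬ h2 < v := by
            have := List.head?_dropWhile_not (fun d => decide (d < v)) K
            rw [← hK2def, hcase] at this
            simpa using this
          have hh2v : v < h2 := by
            rcases lt_or_eq_of_le (le_of_not_gt hh2) with h | h
            · exact h
            · exfalso
              apply hvK
              rw [hKsplit, hcase, h]
              simp
          rcases List.mem_cons.mp hd with rfl | hd'
          · exact hh2v
          · have hsub : K2.Sublist K := by rw [hK2def]; exact List.dropWhile_sublist _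
            have hpw2 : K2.Pairwise (· < ·) := hKpw.sublist hsub
            rw [hcase] at hpw2
            exact hh2v.trans ((List.pairwise_cons.mp hpw2).1 d hd')
      have hinsK : PySem.List.insertBy (fun a b => decide (a < b)) v K = K1 ++ v :: K2 := by
        rw [hKsplit, pvInsertBy_skip _ v K1 K2 (by intro e he; simpa using not_lt.mpr (le_of_lt (hK1 e he))),
          pvInsertBy_front _ v K2 (by intro e he; simpa using hK2 e he)]
      rw [hinsK, hKsplit]
      rw [List.flatMap_append, List.flatMap_append, List.flatMap_cons]
      have hskip : ∀ e ∈ K1.flatMap (fun dv => t.filter (fun e => key e == dv)),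
          (fun a b => decide (key a < key b)) x e = false := by
        intro e he
        obtain ⟨d, hd, hef⟩ := List.mem_flatMap.mp he
        have := pvKey_of_mem_filter hef
        simp only [decide_eq_false_iff_not, not_lt, ← hv, this]
        exact le_of_lt (hK1 d hd)
      have hfront : ∀ e ∈ K2.flatMap (fun dv => t.filter (fun e => key e == dv)),
          (fun a b => decide (key a < key b)) x e = true := by
        intro e he
        obtain ⟨d, hd, hef⟩ := List.mem_flatMap.mp he
        have := pvKey_of_mem_filter hef
        simp only [decide_eq_true_eq, ← hv, this]
        exact hK2 d hd
      rw [pvInsertBy_skip _ x _ _ hskip, pvInsertBy_front _ x _ hfront]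
      have hgr : ∀ S : List Int, (∀ d ∈ S, d ≠ v) →
          S.flatMap (fun dv => (t ++ [x]).filter (fun e => key e == dv))
            = S.flatMap (fun dv => t.filter (fun e => key e == dv)) := by
        intro S hS
        refine pvFlatMap_congr ?_
        intro d hd
        rw [hfilt d, if_neg (fun hc => hS d hd hc.symm), List.append_nil]
      have hgv : (t ++ [x]).filter (fun e => key e == v) = [x] := by
        rw [hfilt v, if_pos rfl]
        have : t.filter (fun e => key e == v) = [] := by
          rw [List.filter_eq_nil_iff]
          intro e he hc
          exact hvm (by rw [hm]; exact List.mem_map.mpr ⟨e, he, by simpa using hc⟩)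
        rw [this]; rfl
      rw [hgr K1 (fun d hd => ne_of_lt (hK1 d hd)),
        hgr K2 (fun d hd => (ne_of_lt (hK2 d hd)).symm), hgv]
      rfl

def pvDist (points : List (List Int)) (i j : Int) : Int :=
  |ptX (PySem.List.pyGetD points i []) - ptX (PySem.List.pyGetD points j [])| +
  |ptY (PySem.List.pyGetD points i []) - ptY (PySem.List.pyGetD points j [])|

def pvEdges (points : List (List Int)) : List (Int × Int × Int) :=
  (PySem.List.pyRange 0 (PySem.List.len points) 1).flatMap (fun i =>
    (PySem.List.pyRange 0 i 1).map (fun j => (pvDist points i j, i, j)))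

lemma runPairs_flat (dv : Int) : ∀ (pairs : List (Int × Int)) (st : UF)
    (rest : List (Int × Int × Int)),
    runFlat st (pairs.map (fun p => (dv, p.1, p.2)) ++ rest)
      = if (runPairs st pairs).2 then runFlat (runPairs st pairs).1 rest else dv := by
  intro pairs
  induction pairs with
  | nil => intro st rest; rfl
  | cons p ps ihp =>
    intro st rest
    have hcons : runPairs st (p :: ps)
        = (if (ufUnion st p.1 p.2 1).2 then runPairs (ufUnion st p.1 p.2 1).1 ps
           else ((ufUnion st p.1 p.2 1).1, false)) := rfl
    rw [List.map_cons, List.cons_append, runFlat_cons, hcons]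
    cases hU : (ufUnion st p.1 p.2 1).2
    · simp
    · simpa using ihp (ufUnion st p.1 p.2 1).1 rest

lemma runKeys_flat (bucket : PySem.Dict Int (List (Int × Int))) : ∀ (keys : List Int) (st : UF),
    runKeys st bucket keys
      = runFlat st (keys.flatMap (fun dv => (bucket.getD dv []).map (fun p => (dv, p.1, p.2)))) := by
  intro keys
  induction keys with
  | nil => intro st; rfl
  | cons dv rest ihk =>
    intro st
    rw [List.flatMap_cons, runPairs_flat dv (bucket.getD dv []) st, runKeys]
    cases hr : (runPairs st (bucket.getD dv [])).2
    · simp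
    · simp only [if_pos rfl]
      exact ihk _

lemma pvEdges_mem {points : List (List Int)} {e : Int × Int × Int} (he : e ∈ pvEdges points) :
    ∃ a b : Nat, a < points.length ∧ b < points.length ∧ e.2.1 = (a : Int) ∧ e.2.2 = (b : Int) := by
  obtain ⟨i, hi, hmem⟩ := List.mem_flatMap.mp he
  obtain ⟨j, hj, rfl⟩ := List.mem_map.mp hmem
  obtain ⟨hi0, hilt⟩ := (PySem.List.mem_pyRange_one).mp hi
  obtain ⟨hj0, hjlt⟩ := (PySem.List.mem_pyRange_one).mp hj
  simp only [PySem.List.len_eq] at hilt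
  refine ⟨i.toNat, j.toNat, by omega, by omega, ?_, ?_⟩ <;> simp <;> omega

lemma pvGetD_pyRange {n k : Nat} (hk : k < n) :
    (PySem.List.pyRange 0 (n : Int) 1).getD k 0 = (k : Int) := by
  have hlen : (PySem.List.pyRange 0 (n : Int) 1).length = n := by
    rw [PySem.List.length_pyRange_one]; omega
  rw [List.getD, List.getElem?_eq_getElem (by omega), PySem.List.getElem_pyRange_one]
  simp

lemma pvGetD_replicate {n k : Nat} (v : Int) (hk : k < n) :
    (List.replicate n v).getD k 0 = v := by
  rw [List.getD, List.getElem?_eq_getElem (by simp [hk]), List.getElem_replicate]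
  rfl

lemma pvInitRel (points : List (List Int)) :
    pvRel ⟨PySem.List.pyRange 0 (points.length : Int) 1, List.replicate points.length 1,
           List.replicate points.length 0⟩
      (PySem.List.pyRange 0 (points.length : Int) 1)
      (List.replicate points.length 0) points.length := by
  set n := points.length with hn
  have hfix : ∀ k, k < n → pvParent (PySem.List.pyRange 0 (n : Int) 1) k = k := by
    intro k hk
    unfold pvParent
    rw [pvGetD_pyRange hk]
    simp
  have hlen : (PySem.List.pyRange 0 (n : Int) 1).length = n := by
    rw [PySem.List.length_pyRange_one]; omega
  have hroot : ∀ k, k < n → pvRootF (PySem.List.pyRange 0 (n : Int) 1) n k = k :=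
    fun k hk => (pvRoot_of_fix (by omega) (hfix k hk)).1
  refine ⟨⟨hlen, by rw [List.length_replicate], ?_, ?_, ?_, ?_⟩, hlen, by rw [List.length_replicate], ?_, ?_, ?_⟩
  · intro i hi
    rw [pvGetD_pyRange hi]
    constructor
    · positivity
    · exact_mod_cast hi
  · intro i hi
    rw [pvGetD_replicate _ hi]
    exact Or.inl rfl
  · intro i hi _
    exact pvGetD_replicate _ hi
  · intro i hi
    rw [(pvRoot_of_fix (by omega) (hfix i hi)).2.2]
    rfl
  · intro k hk
    rw [pvGetD_replicate _ hk]
    exact Or.inl rfl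
  · intro k l hk hl
    rw [hroot k hk, hroot l hl, pvGetD_pyRange hk, pvGetD_pyRange hl]
    constructor
    · intro h; exact_mod_cast h
    · intro h; exact_mod_cast h
  · intro k l hk hl _
    rw [(pvRoot_of_fix (by omega) (hfix k hk)).2.1, (pvRoot_of_fix (by omega) (hfix l hl)).2.1,
      pvGetD_replicate _ hk, pvGetD_replicate _ hl]

lemma pvPyGetD_take {l : List (List Int)} {i j : Int} (h0 : 0 ≤ j) (hj : j < i)
    (hil : i ≤ (l.length : Int)) :
    PySem.List.pyGetD (l.take i.toNat) j [] = PySem.List.pyGetD l j [] := by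
  have hjl : j < (l.length : Int) := lt_of_lt_of_le hj hil
  have h1 : j < ((l.take i.toNat).length : Int) := by
    simp [List.length_take]
    omega
  rw [PySem.List.pyGetD_eq_getElem (xs := l.take i.toNat) (d := ([] : List Int)) h0 (by simpa using h1),
    PySem.List.pyGetD_eq_getElem (xs := l) (d := ([] : List Int)) h0 (by simpa using hjl),
    List.getElem_take]

lemma buildBucket_eq (points : List (List Int)) :
    buildBucket points
      = (pvEdges points).foldl (fun d e => d.modify e.1 [] (· ++ [e.2])) PySem.Dict.empty := by
  unfold buildBucket pvEdges
  rw [List.foldl_flatMap]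
  rw [PySem.List.enumerate_eq_map_pyRange points ([] : List Int), List.foldl_map]
  refine PySem.List.foldl_congr_mem _ _ _ _ ?_
  intro d i hi
  dsimp only
  obtain ⟨hi0, hilt⟩ := (PySem.List.mem_pyRange_one).mp hi
  simp only [PySem.List.len_eq] at hilt
  rw [List.foldl_map]
  rw [PySem.List.slice_to points hi0]
  rw [PySem.List.enumerate_eq_map_pyRange _ ([] : List Int), List.foldl_map]
  have hlt : PySem.List.len (points.take i.toNat) = i := by
    simp [PySem.List.len_eq, List.length_take]
    omega
  rw [hlt]
  refine PySem.List.foldl_congr_mem _ _ _ _ ?_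
  intro d2 j hj
  dsimp only
  obtain ⟨hj0, hjlt⟩ := (PySem.List.mem_pyRange_one).mp hj
  rw [pvPyGetD_take hj0 hjlt (le_of_lt hilt)]
  rfl

lemma bEdges_eq (points : List (List Int)) :
    ((PySem.List.pyRange 0 (PySem.List.len points) 1).foldl (fun acc i =>
      (PySem.List.pyRange 0 i 1).foldl (fun acc2 j =>
        acc2 ++ [(|ptX (PySem.List.pyGetD points i []) - ptX (PySem.List.pyGetD points j [])| +
                  |ptY (PySem.List.pyGetD points i []) - ptY (PySem.List.pyGetD points j [])|,
                  i, j)]) acc) ([] : List (Int × Int × Int)))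
    = pvEdges points := by
  simp only [PySem.List.foldl_append_singleton_eq_map]
  rw [PySem.List.foldl_append_eq_flatMap]
  rfl

lemma bucket_keys (points : List (List Int)) :
    (buildBucket points).keys = PySem.Set.ofList ((pvEdges points).map (fun e => e.1)) := by
  rw [buildBucket_eq]
  rw [PySem.Dict.keys_foldl_modify_key (pvEdges points) (fun e => e.1) []
    (fun _ e => (· ++ [e.2])) PySem.Dict.empty]
  rfl

lemma bucket_getD (points : List (List Int)) (dv : Int) :
    (buildBucket points).getD dv []
      = ((pvEdges points).filter (fun e => e.1 == dv)).map (fun e => e.2) := by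
  rw [buildBucket_eq]
  have := PySem.Dict.getD_foldl_modify_append (pvEdges points) (PySem.Dict.empty) dv
  simpa using this

lemma aflat_eq (points : List (List Int)) :
    (PySem.List.sorted (buildBucket points).keys (fun k => k) false).flatMap
      (fun dv => ((buildBucket points).getD dv []).map (fun p => (dv, p.1, p.2)))
    = PySem.List.sorted (pvEdges points) (fun e => e.1) false := by
  rw [pvGroupSort (fun e => e.1) (pvEdges points), bucket_keys]
  refine pvFlatMap_congr ?_
  intro dv _
  rw [bucket_getD, List.map_map]
  have hcg : ∀ e ∈ (pvEdges points).filter (fun e => e.1 == dv),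
      ((fun p : Int × Int => (dv, p.1, p.2)) ∘ (fun e : Int × Int × Int => e.2)) e = e := by
    intro e he
    have hke : e.1 = dv := by simpa using (List.of_mem_filter he)
    show (dv, e.2.1, e.2.2) = e
    rw [← hke]
  rw [List.map_congr_left hcg]
  simp

-- ===== VERDICT (by name: the statement is the Claim_ definition above) =====
theorem maxPartitionFactor_spec : Claim_equal_maxPartitionFactor := by
  intro points _ _
  unfold Spec_maxPartitionFactor
  show maxPartitionFactor points = maxPartitionFactor_alt points
  unfold maxPartitionFactor maxPartitionFactor_alt
  dsimp only
  rw [runKeys_flat, aflat_eq, bEdges_eq]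
  have hlen0 : PySem.List.len points = (points.length : Int) := by simp [PySem.List.len_eq]
  rw [hlen0]
  refine pvRun_eq _ _ _ _ (pvInitRel points) ?_
  intro e he
  exact pvEdges_mem ((PySem.List.mem_sorted _ _ _ _).mp he)
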